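-- pv_equiv track=rewrite | github.com/thomshetland/graphTM-project | src/utils/utils.py | build_hex_adjacency
-- ===== SOURCE A (Python) =====
-- def build_hex_adjacency(board_size):
--     edges = {}
--     for i in range(board_size):
--         for j in range(board_size):
--             edges[(i, j)] = []
--
--     LEFT   = (-2, -1)
--     RIGHT  = (-1, -2)
--     TOP    = (-1, -1)
--     BOTTOM = (-2, -2)
--
--     edges[LEFT] = []
--     edges[RIGHT] = []
--     edges[TOP] = []
--     edges[BOTTOM] = []
--
--     def connect(a, b):
--         if b not in edges[a]:
--             edges[a].append(b)
--
--     for i in range(board_size):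
--         for j in range(board_size):
--             node = (i, j)
--
--             if i + 1 < board_size:
--                 connect(node, (i+1, j))
--                 connect((i+1, j), node)
--
--             if i + 1 < board_size and j - 1 >= 0:
--                 connect(node, (i+1, j-1))
--                 connect((i+1, j-1), node)
--
--             if j + 1 < board_size:
--                 connect(node, (i, j+1))
--                 connect((i, j+1), node)
--
--             if i - 1 >= 0:
--                 connect(node, (i-1, j))
--                 connect((i-1, j), node)
--
--             if j - 1 >= 0:
--                 connect(node, (i, j-1))
--                 connect((i, j-1), node)
--
--             if i - 1 >= 0 and j + 1 < board_size:
--                 connect(node, (i-1, j+1))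
--                 connect((i-1, j+1), node)
--
--             # virtual nodes
--             if j == 0:
--                 connect(node, LEFT)
--                 connect(LEFT, node)
--
--             if j == board_size - 1:
--                 connect(node, RIGHT)
--                 connect(RIGHT, node)
--
--             if i == 0:
--                 connect(node, TOP)
--                 connect(TOP, node)
--
--             if i == board_size - 1:
--                 connect(node, BOTTOM)
--                 connect(BOTTOM, node)
--
--     return edges
-- ===== SOURCE B (Python) =====
-- LEFT   = (-2, -1)
-- RIGHT  = (-1, -2)
-- TOP    = (-1, -1)
-- BOTTOM = (-2, -2)
--
-- def _nbrs(n, i, j):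
--     out = [(a, b)
--            for (a, b) in [(i-1, j), (i-1, j+1), (i, j-1),
--                           (i+1, j), (i+1, j-1), (i, j+1)]
--            if 0 <= a < n and 0 <= b < n]
--     if j == 0:
--         out.append(LEFT)
--     if j == n - 1:
--         out.append(RIGHT)
--     if i == 0:
--         out.append(TOP)
--     if i == n - 1:
--         out.append(BOTTOM)
--     return out
--
-- def build_hex_adjacency(board_size):
--     n = board_size
--     items = [((i, j), _nbrs(n, i, j)) for i in range(n) for j in range(n)]
--     items.append((LEFT,   [(i, 0) for i in range(n)]))
--     items.append((RIGHT,  [(i, n - 1) for i in range(n)]))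
--     items.append((TOP,    [(0, j) for j in range(n)]))
--     items.append((BOTTOM, [(n - 1, j) for j in range(n)]))
--     return dict(items)
-- ===== Notes on version B (the rewrite author's own statement) =====
-- stated objective: simpler
-- what changed: B computes each cell's neighbour list directly by a closed-form per-cell rule (row-major predecessors, then successors, then virtual borders) and the virtual nodes' lists as border comprehensions, instead of A's mutate-and-dedup scatter loop with reverse connects and membership checks.
import Mathlib
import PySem

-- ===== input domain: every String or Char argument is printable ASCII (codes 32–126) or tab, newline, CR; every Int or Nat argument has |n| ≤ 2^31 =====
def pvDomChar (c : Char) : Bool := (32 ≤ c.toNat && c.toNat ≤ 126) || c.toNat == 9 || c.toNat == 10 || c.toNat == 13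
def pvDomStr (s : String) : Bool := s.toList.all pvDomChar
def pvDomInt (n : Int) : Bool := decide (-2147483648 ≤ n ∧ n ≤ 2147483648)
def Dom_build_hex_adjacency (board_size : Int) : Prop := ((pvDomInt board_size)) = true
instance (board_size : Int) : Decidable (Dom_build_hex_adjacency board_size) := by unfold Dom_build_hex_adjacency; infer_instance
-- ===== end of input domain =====

-- B replaces A's mutate-and-dedup scatter loop (reverse connects + membership checks) by a
-- direct per-cell closed-form neighbour rule and border comprehensions for the virtual nodes.

-- ===== PORT A =====
def pvL : Int × Int := (-2, -1)
def pvR : Int × Int := (-1, -2)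
def pvT : Int × Int := (-1, -1)
def pvB : Int × Int := (-2, -2)

-- `if b not in edges[a]: edges[a].append(b)`; `a` is always a present key at every call site,
-- so `edges[a]` is `getD a []` exactly.
def pvConnect (e : PySem.Dict (Int × Int) (List (Int × Int))) (a b : Int × Int) :
    PySem.Dict (Int × Int) (List (Int × Int)) :=
  if b ∈ e.getD a [] then e else e.modify a [] (fun l => l ++ [b])

-- the body of A's double loop, one `let` per reassignment of `edges`
def pvStepA (n : Int) (e0 : PySem.Dict (Int × Int) (List (Int × Int))) (i j : Int) :
    PySem.Dict (Int × Int) (List (Int × Int)) :=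
  let node : Int × Int := (i, j)
  let e1 := if i + 1 < n then pvConnect (pvConnect e0 node (i+1, j)) (i+1, j) node else e0
  let e2 := if i + 1 < n ∧ j - 1 ≥ 0 then pvConnect (pvConnect e1 node (i+1, j-1)) (i+1, j-1) node else e1
  let e3 := if j + 1 < n then pvConnect (pvConnect e2 node (i, j+1)) (i, j+1) node else e2
  let e4 := if i - 1 ≥ 0 then pvConnect (pvConnect e3 node (i-1, j)) (i-1, j) node else e3
  let e5 := if j - 1 ≥ 0 then pvConnect (pvConnect e4 node (i, j-1)) (i, j-1) node else e4
  let e6 := if i - 1 ≥ 0 ∧ j + 1 < n then pvConnect (pvConnect e5 node (i-1, j+1)) (i-1, j+1) node else e5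
  let e7 := if j = 0 then pvConnect (pvConnect e6 node pvL) pvL node else e6
  let e8 := if j = n - 1 then pvConnect (pvConnect e7 node pvR) pvR node else e7
  let e9 := if i = 0 then pvConnect (pvConnect e8 node pvT) pvT node else e8
  if i = n - 1 then pvConnect (pvConnect e9 node pvB) pvB node else e9

def build_hex_adjacency (board_size : Int) : List (Int × Int × List (Int × Int)) :=
  let edges : PySem.Dict (Int × Int) (List (Int × Int)) :=
    (PySem.List.pyRange 0 board_size 1).foldl
      (fun e i => (PySem.List.pyRange 0 board_size 1).foldl (fun e j => e.insert (i, j) []) e)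
      PySem.Dict.empty
  let edges := (((edges.insert pvL []).insert pvR []).insert pvT []).insert pvB []
  let edges :=
    (PySem.List.pyRange 0 board_size 1).foldl
      (fun e i => (PySem.List.pyRange 0 board_size 1).foldl (fun e j => pvStepA board_size e i j) e)
      edges
  edges.items.map (fun p => (p.1.1, p.1.2, p.2))

-- ===== PORT B =====
def pvNbrs (n i j : Int) : List (Int × Int) :=
  ([(i-1, j), (i-1, j+1), (i, j-1), (i+1, j), (i+1, j-1), (i, j+1)].filter
      (fun p => decide (0 ≤ p.1 ∧ p.1 < n ∧ 0 ≤ p.2 ∧ p.2 < n)))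
  ++ (if j = 0 then [pvL] else [])
  ++ (if j = n - 1 then [pvR] else [])
  ++ (if i = 0 then [pvT] else [])
  ++ (if i = n - 1 then [pvB] else [])

-- Source B returns dict(items); the keys of `items` are pairwise distinct, so the resulting dict is
-- exactly the `items` association list in order (exact here).
def build_hex_adjacency_alt (board_size : Int) : List (Int × Int × List (Int × Int)) :=
  ((PySem.List.pyRange 0 board_size 1).flatMap (fun i =>
      (PySem.List.pyRange 0 board_size 1).map (fun j => (i, j, pvNbrs board_size i j))))
  ++ [(-2, -1, (PySem.List.pyRange 0 board_size 1).map (fun i => (i, (0:Int)))),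
      (-1, -2, (PySem.List.pyRange 0 board_size 1).map (fun i => (i, board_size - 1))),
      (-1, -1, (PySem.List.pyRange 0 board_size 1).map (fun j => ((0:Int), j))),
      (-2, -2, (PySem.List.pyRange 0 board_size 1).map (fun j => (board_size - 1, j)))]

-- ===== PRECONDITION & SPEC =====
def Spec_build_hex_adjacency (board_size : Int) (out : List (Int × Int × List (Int × Int))) : Prop := out = build_hex_adjacency_alt board_size
instance (board_size : Int) (out : List (Int × Int × List (Int × Int))) : Decidable (Spec_build_hex_adjacency board_size out) := by unfold Spec_build_hex_adjacency; infer_instance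

-- ===== CLAIM (what is proved, stated in full; the proofs are below) =====
def Claim_equal_build_hex_adjacency : Prop := ∀ (board_size : Int), Dom_build_hex_adjacency board_size → Spec_build_hex_adjacency board_size (build_hex_adjacency board_size)

-- ===== LEMMAS AND PROOFS =====

def pvInb (n : Int) (p : Int × Int) : Bool :=
  decide (0 ≤ p.1 ∧ p.1 < n ∧ 0 ≤ p.2 ∧ p.2 < n)

-- cells strictly before (i, j) in row-major order
def pvDone (i j : Int) (p : Int × Int) : Bool :=
  decide (p.1 < i ∨ (p.1 = i ∧ p.2 < j))

def keysG (n : Int) : List (Int × Int) :=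
  PySem.List.pyRange 0 n 1 ×ˢ PySem.List.pyRange 0 n 1

def keysAll (n : Int) : List (Int × Int) := keysG n ++ [pvL, pvR, pvT, pvB]

def borderL (n : Int) : List (Int × Int) := (PySem.List.pyRange 0 n 1).map (fun a => (a, (0:Int)))
def borderR (n : Int) : List (Int × Int) := (PySem.List.pyRange 0 n 1).map (fun a => (a, n-1))
def borderT (n : Int) : List (Int × Int) := (PySem.List.pyRange 0 n 1).map (fun b => ((0:Int), b))
def borderB (n : Int) : List (Int × Int) := (PySem.List.pyRange 0 n 1).map (fun b => (n-1, b))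

-- the value each key holds once all cells before (i, j) have been processed
def valAt (n i j : Int) (k : Int × Int) : List (Int × Int) :=
  if k = pvL then (borderL n).filter (pvDone i j)
  else if k = pvR then (borderR n).filter (pvDone i j)
  else if k = pvT then (borderT n).filter (pvDone i j)
  else if k = pvB then (borderB n).filter (pvDone i j)
  else if pvDone i j k then pvNbrs n k.1 k.2
  else [(k.1 - 1, k.2), (k.1 - 1, k.2 + 1), (k.1, k.2 - 1)].filter
         (fun p => pvInb n p && pvDone i j p)

-- pvConnect, on the level of value functions
def updC (g : Int × Int → List (Int × Int)) (a b : Int × Int) : Int × Int → List (Int × Int) :=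
  fun k => if k = a then (if b ∈ g a then g a else g a ++ [b]) else g k

def stepF (n i j : Int) (g : Int × Int → List (Int × Int)) : Int × Int → List (Int × Int) :=
  let node : Int × Int := (i, j)
  let g1 := if i + 1 < n then updC (updC g node (i+1, j)) (i+1, j) node else g
  let g2 := if i + 1 < n ∧ j - 1 ≥ 0 then updC (updC g1 node (i+1, j-1)) (i+1, j-1) node else g1
  let g3 := if j + 1 < n then updC (updC g2 node (i, j+1)) (i, j+1) node else g2
  let g4 := if i - 1 ≥ 0 then updC (updC g3 node (i-1, j)) (i-1, j) node else g3
  let g5 := if j - 1 ≥ 0 then updC (updC g4 node (i, j-1)) (i, j-1) node else g4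
  let g6 := if i - 1 ≥ 0 ∧ j + 1 < n then updC (updC g5 node (i-1, j+1)) (i-1, j+1) node else g5
  let g7 := if j = 0 then updC (updC g6 node pvL) pvL node else g6
  let g8 := if j = n - 1 then updC (updC g7 node pvR) pvR node else g7
  let g9 := if i = 0 then updC (updC g8 node pvT) pvT node else g8
  if i = n - 1 then updC (updC g9 node pvB) pvB node else g9

def pvInv (n : Int) (e : PySem.Dict (Int × Int) (List (Int × Int)))
    (g : Int × Int → List (Int × Int)) : Prop :=
  e.keys = keysAll n ∧ ∀ k ∈ keysAll n, e.getD k [] = g k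


lemma valAt_L (n i j : Int) : valAt n i j pvL = (borderL n).filter (pvDone i j) := by
  simp [valAt]

lemma valAt_R (n i j : Int) : valAt n i j pvR = (borderR n).filter (pvDone i j) := by
  simp [valAt, pvL, pvR]

lemma valAt_T (n i j : Int) : valAt n i j pvT = (borderT n).filter (pvDone i j) := by
  simp [valAt, pvL, pvR, pvT]

lemma valAt_B (n i j : Int) : valAt n i j pvB = (borderB n).filter (pvDone i j) := by
  simp [valAt, pvL, pvR, pvT, pvB]

lemma valAt_grid (n i j a b : Int) (ha : 0 ≤ a) (hb : 0 ≤ b) :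
    valAt n i j (a, b) =
      if pvDone i j (a, b) then pvNbrs n a b
      else [(a-1, b), (a-1, b+1), (a, b-1)].filter (fun p => pvInb n p && pvDone i j p) := by
  have h1 : ((a, b) : Int × Int) ≠ pvL := by simp [pvL, Prod.ext_iff]; omega
  have h2 : ((a, b) : Int × Int) ≠ pvR := by simp [pvR, Prod.ext_iff]; omega
  have h3 : ((a, b) : Int × Int) ≠ pvT := by simp [pvT, Prod.ext_iff]; omega
  have h4 : ((a, b) : Int × Int) ≠ pvB := by simp [pvB, Prod.ext_iff]; omega
  rw [valAt, if_neg h1, if_neg h2, if_neg h3, if_neg h4]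

lemma mem_borderL {n x y : Int} : (x, y) ∈ borderL n ↔ (0 ≤ x ∧ x < n) ∧ y = 0 := by
  unfold borderL
  rw [List.mem_map]
  constructor
  · rintro ⟨a, ha, heq⟩
    rw [PySem.List.mem_pyRange_one] at ha
    rw [Prod.mk.injEq] at heq
    obtain ⟨h1, h2⟩ := heq
    subst h1; subst h2; exact ⟨⟨ha.1, ha.2⟩, rfl⟩
  · rintro ⟨⟨h1, h2⟩, rfl⟩
    exact ⟨x, PySem.List.mem_pyRange_one.mpr ⟨h1, h2⟩, rfl⟩

lemma mem_borderR {n x y : Int} : (x, y) ∈ borderR n ↔ (0 ≤ x ∧ x < n) ∧ y = n - 1 := by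
  unfold borderR
  rw [List.mem_map]
  constructor
  · rintro ⟨a, ha, heq⟩
    rw [PySem.List.mem_pyRange_one] at ha
    rw [Prod.mk.injEq] at heq
    obtain ⟨h1, h2⟩ := heq
    subst h1; subst h2; exact ⟨⟨ha.1, ha.2⟩, rfl⟩
  · rintro ⟨⟨h1, h2⟩, rfl⟩
    exact ⟨x, PySem.List.mem_pyRange_one.mpr ⟨h1, h2⟩, rfl⟩

lemma mem_borderT {n x y : Int} : (x, y) ∈ borderT n ↔ x = 0 ∧ (0 ≤ y ∧ y < n) := by
  unfold borderT
  rw [List.mem_map]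
  constructor
  · rintro ⟨a, ha, heq⟩
    rw [PySem.List.mem_pyRange_one] at ha
    rw [Prod.mk.injEq] at heq
    obtain ⟨h1, h2⟩ := heq
    subst h1; subst h2; exact ⟨rfl, ha.1, ha.2⟩
  · rintro ⟨rfl, h1, h2⟩
    exact ⟨y, PySem.List.mem_pyRange_one.mpr ⟨h1, h2⟩, rfl⟩

lemma mem_borderB {n x y : Int} : (x, y) ∈ borderB n ↔ x = n - 1 ∧ (0 ≤ y ∧ y < n) := by
  unfold borderB
  rw [List.mem_map]
  constructor
  · rintro ⟨a, ha, heq⟩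
    rw [PySem.List.mem_pyRange_one] at ha
    rw [Prod.mk.injEq] at heq
    obtain ⟨h1, h2⟩ := heq
    subst h1; subst h2; exact ⟨rfl, ha.1, ha.2⟩
  · rintro ⟨rfl, h1, h2⟩
    exact ⟨y, PySem.List.mem_pyRange_one.mpr ⟨h1, h2⟩, rfl⟩

lemma mem_keysG {n a b : Int} : (a, b) ∈ keysG n ↔ (0 ≤ a ∧ a < n) ∧ (0 ≤ b ∧ b < n) := by
  simp [keysG, List.mem_product, PySem.List.mem_pyRange_one]

lemma nodup_keysAll (n : Int) : (keysAll n).Nodup := by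
  have hg : (keysG n).Nodup :=
    List.Nodup.product (PySem.List.nodup_pyRange_one 0 n) (PySem.List.nodup_pyRange_one 0 n)
  have hv : ([pvL, pvR, pvT, pvB] : List (Int × Int)).Nodup := by decide
  refine (List.nodup_append).mpr ⟨hg, hv, ?_⟩
  intro x hx
  obtain ⟨a, b⟩ := x
  rw [mem_keysG] at hx
  simp [pvL, pvR, pvT, pvB, Prod.ext_iff]
  omega

lemma connect_inv {n : Int} {e : PySem.Dict (Int × Int) (List (Int × Int))}
    {g : Int × Int → List (Int × Int)} (h : pvInv n e g) {a : Int × Int} (ha : a ∈ keysAll n)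
    (b : Int × Int) : pvInv n (pvConnect e a b) (updC g a b) := by
  obtain ⟨hk, hv⟩ := h
  have hga : e.getD a [] = g a := hv a ha
  unfold pvConnect updC
  by_cases hm : b ∈ e.getD a []
  · rw [if_pos hm]
    refine ⟨hk, fun k hkk => ?_⟩
    rw [hga] at hm
    by_cases hke : k = a
    · subst hke; simp only [if_pos rfl, if_pos hm]; exact hv k hkk
    · simp only [if_neg hke]; exact hv k hkk
  · rw [if_neg hm]
    have hcont : e.contains a = true := by
      rw [PySem.Dict.contains_eq_decide_mem_keys, hk]
      simpa using ha
    constructor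
    · rw [PySem.Dict.keys_modify, PySem.Dict.keys_insert_of_contains _ _ hcont, hk]
    · intro k hkk
      rw [PySem.Dict.getD_modify]
      rw [hga] at hm
      by_cases hke : k = a
      · subst hke; simp only [if_pos rfl, if_neg hm, hga]
      · simp only [if_neg hke]; exact hv k hkk

lemma ite_inv {n : Int} {c : Prop} [Decidable c]
    {e e' : PySem.Dict (Int × Int) (List (Int × Int))} {g g' : Int × Int → List (Int × Int)}
    (h : pvInv n e g) (h' : c → pvInv n e' g') :
    pvInv n (if c then e' else e) (if c then g' else g) := by
  split
  · exact h' ‹c›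
  · exact h

lemma pvInv_congr {n : Int} {e : PySem.Dict (Int × Int) (List (Int × Int))}
    {g g' : Int × Int → List (Int × Int)} (h : pvInv n e g)
    (hgg : ∀ k ∈ keysAll n, g k = g' k) : pvInv n e g' :=
  ⟨h.1, fun k hk => (h.2 k hk).trans (hgg k hk)⟩

def blkE (c : Prop) [Decidable c] (e : PySem.Dict (Int × Int) (List (Int × Int)))
    (node p : Int × Int) : PySem.Dict (Int × Int) (List (Int × Int)) :=
  if c then pvConnect (pvConnect e node p) p node else e

def blkG (c : Prop) [Decidable c] (g : Int × Int → List (Int × Int))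
    (node p : Int × Int) : Int × Int → List (Int × Int) :=
  if c then updC (updC g node p) p node else g

lemma blk_inv {n : Int} {c : Prop} [Decidable c] {e : PySem.Dict (Int × Int) (List (Int × Int))}
    {g : Int × Int → List (Int × Int)} {node p : Int × Int}
    (h : pvInv n e g) (hnode : node ∈ keysAll n) (hp : c → p ∈ keysAll n) :
    pvInv n (blkE c e node p) (blkG c g node p) := by
  unfold blkE blkG
  exact ite_inv h (fun hc => connect_inv (connect_inv h hnode p) (hp hc) node)

lemma step_inv {n : Int} {e : PySem.Dict (Int × Int) (List (Int × Int))}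
    {g : Int × Int → List (Int × Int)} {i j : Int} (h0i : 0 ≤ i) (hin : i < n)
    (h0j : 0 ≤ j) (hjn : j < n) (h : pvInv n e g) :
    pvInv n (pvStepA n e i j) (stepF n i j g) := by
  have mem_g : ∀ a b : Int, 0 ≤ a → a < n → 0 ≤ b → b < n → (a, b) ∈ keysAll n := by
    intro a b h1 h2 h3 h4
    exact List.mem_append_left _ (mem_keysG.mpr ⟨⟨h1, h2⟩, ⟨h3, h4⟩⟩)
  have memL : pvL ∈ keysAll n := by simp [keysAll]
  have memR : pvR ∈ keysAll n := by simp [keysAll]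
  have memT : pvT ∈ keysAll n := by simp [keysAll]
  have memB : pvB ∈ keysAll n := by simp [keysAll]
  have m00 : ((i, j) : Int × Int) ∈ keysAll n := mem_g i j h0i hin h0j hjn
  show pvInv n
    (blkE (i = n - 1)
      (blkE (i = 0)
        (blkE (j = n - 1)
          (blkE (j = 0)
            (blkE (i - 1 ≥ 0 ∧ j + 1 < n)
              (blkE (j - 1 ≥ 0)
                (blkE (i - 1 ≥ 0)
                  (blkE (j + 1 < n)
                    (blkE (i + 1 < n ∧ j - 1 ≥ 0)
                      (blkE (i + 1 < n) e (i, j) (i+1, j))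
                      (i, j) (i+1, j-1))
                    (i, j) (i, j+1))
                  (i, j) (i-1, j))
                (i, j) (i, j-1))
              (i, j) (i-1, j+1))
            (i, j) pvL)
          (i, j) pvR)
        (i, j) pvT)
      (i, j) pvB)
    (blkG (i = n - 1)
      (blkG (i = 0)
        (blkG (j = n - 1)
          (blkG (j = 0)
            (blkG (i - 1 ≥ 0 ∧ j + 1 < n)
              (blkG (j - 1 ≥ 0)
                (blkG (i - 1 ≥ 0)
                  (blkG (j + 1 < n)
                    (blkG (i + 1 < n ∧ j - 1 ≥ 0)
                      (blkG (i + 1 < n) g (i, j) (i+1, j))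
                      (i, j) (i+1, j-1))
                    (i, j) (i, j+1))
                  (i, j) (i-1, j))
                (i, j) (i, j-1))
              (i, j) (i-1, j+1))
            (i, j) pvL)
          (i, j) pvR)
        (i, j) pvT)
      (i, j) pvB)
  exact blk_inv (blk_inv (blk_inv (blk_inv (blk_inv (blk_inv (blk_inv (blk_inv (blk_inv
    (blk_inv h m00 (fun hc => mem_g _ _ (by omega) hc h0j hjn))
    m00 (fun hc => mem_g _ _ (by omega) hc.1 (by omega) (by omega)))
    m00 (fun hc => mem_g _ _ h0i hin (by omega) hc))
    m00 (fun hc => mem_g _ _ (by omega) (by omega) h0j hjn))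
    m00 (fun hc => mem_g _ _ h0i hin (by omega) (by omega)))
    m00 (fun hc => mem_g _ _ (by omega) (by omega) (by omega) hc.2))
    m00 (fun _ => memL))
    m00 (fun _ => memR))
    m00 (fun _ => memT))
    m00 (fun _ => memB)

lemma filter_prefix (n m : Int) (f : Int → Int × Int) (p : Int × Int → Bool)
    (h0 : 0 ≤ m) (hm : m ≤ n)
    (h : ∀ a : Int, 0 ≤ a → a < n → p (f a) = decide (a < m)) :
    ((PySem.List.pyRange 0 n 1).map f).filter p = (PySem.List.pyRange 0 m 1).map f := by
  rw [PySem.List.pyRange_one_append 0 m n h0 hm, List.map_append, List.filter_append]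
  rw [List.filter_eq_self.mpr, List.filter_eq_nil_iff.mpr, List.append_nil]
  · intro x hx
    obtain ⟨a, ha, rfl⟩ := List.mem_map.mp hx
    rw [PySem.List.mem_pyRange_one] at ha
    rw [h a (by omega) (by omega)]
    simp; omega
  · intro x hx
    obtain ⟨a, ha, rfl⟩ := List.mem_map.mp hx
    rw [PySem.List.mem_pyRange_one] at ha
    rw [h a (by omega) (by omega)]
    simp; omega


lemma blkG_of_ne {c : Prop} [Decidable c] {g : Int × Int → List (Int × Int)}
    {node p k : Int × Int} (h1 : k ≠ node) (h2 : k ≠ p) : blkG c g node p k = g k := by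
  unfold blkG updC
  split <;> simp [h1, h2]

lemma blkG_node {c : Prop} [Decidable c] {g : Int × Int → List (Int × Int)}
    {node p : Int × Int} (hnp : node ≠ p) :
    blkG c g node p node = if c then (if p ∈ g node then g node else g node ++ [p]) else g node := by
  unfold blkG updC
  split <;> simp [hnp]

lemma blkG_p {c : Prop} [Decidable c] {g : Int × Int → List (Int × Int)}
    {node p : Int × Int} (hpn : p ≠ node) :
    blkG c g node p p = if c then (if node ∈ g p then g p else g p ++ [node]) else g p := by
  unfold blkG updC
  split <;> simp [hpn]

lemma cond_append {c : Prop} [Decidable c] {lv : List (Int × Int)} {x : Int × Int}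
    (hx : x ∉ lv) :
    (if c then (if x ∈ lv then lv else lv ++ [x]) else lv) = lv ++ (if c then [x] else []) := by
  by_cases h1 : c
  · simp [h1, hx]
  · simp [h1]

lemma cond_noop {c : Prop} [Decidable c] {lv : List (Int × Int)} {x : Int × Int}
    (hx : c → x ∈ lv) :
    (if c then (if x ∈ lv then lv else lv ++ [x]) else lv) = lv := by
  by_cases h1 : c
  · simp [h1, hx h1]
  · simp [h1]

lemma mem_ite_singleton {c : Prop} [Decidable c] {x y : Int × Int} :
    x ∈ (if c then [y] else ([] : List (Int × Int))) ↔ c ∧ x = y := by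
  split_ifs with h <;> simp [h]

lemma mem_pvNbrs {n a b x y : Int} (hx0 : 0 ≤ x) (hxn : x < n) (hy0 : 0 ≤ y) (hyn : y < n)
    (hnb : (x = a - 1 ∧ y = b) ∨ (x = a - 1 ∧ y = b + 1) ∨ (x = a ∧ y = b - 1) ∨
           (x = a + 1 ∧ y = b) ∨ (x = a + 1 ∧ y = b - 1) ∨ (x = a ∧ y = b + 1)) :
    ((x, y) : Int × Int) ∈ pvNbrs n a b := by
  rw [pvNbrs]
  refine List.mem_append_left _ (List.mem_append_left _ (List.mem_append_left _
    (List.mem_append_left _ ?_)))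
  rw [List.mem_filter]
  constructor
  · simp only [List.mem_cons, List.not_mem_nil, or_false, Prod.mk.injEq]
    omega
  · simp only [decide_eq_true_eq]
    exact ⟨hx0, hxn, hy0, hyn⟩

lemma stepF_val {n i j : Int} (h0i : 0 ≤ i) (hin : i < n) (h0j : 0 ≤ j) (hjn : j < n) :
    ∀ k ∈ keysAll n, stepF n i j (valAt n i j) k = valAt n i (j+1) k := by
  intro k hk
  have hs : stepF n i j (valAt n i j) = blkG (i = n - 1) (blkG (i = 0) (blkG (j = n - 1) (blkG (j = 0)
      (blkG (i - 1 ≥ 0 ∧ j + 1 < n) (blkG (j - 1 ≥ 0) (blkG (i - 1 ≥ 0)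
        (blkG (j + 1 < n) (blkG (i + 1 < n ∧ j - 1 ≥ 0)
          (blkG (i + 1 < n) (valAt n i j) (i, j) (i+1, j))
          (i, j) (i+1, j-1)) (i, j) (i, j+1)) (i, j) (i-1, j)) (i, j) (i, j-1))
        (i, j) (i-1, j+1)) (i, j) pvL) (i, j) pvR) (i, j) pvT) (i, j) pvB := rfl
  rw [hs]
  rcases List.mem_append.mp hk with hg | hv
  · obtain ⟨a, b⟩ := k
    obtain ⟨⟨ha0, han⟩, hb0, hbn⟩ := mem_keysG.mp hg
    by_cases e0 : ((a, b) : Int × Int) = (i, j)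
    · -- k = (i, j)
      rw [Prod.mk.injEq] at e0
      obtain ⟨h1, h2⟩ := e0
      subst a
      subst b
      have hP : valAt n i j ((i : Int), j) = [(i-1, j), (i-1, j+1), (i, j-1)].filter (pvInb n) := by
        have hnd0 : ¬(pvDone i j ((i : Int), j) = true) := by
          simp only [pvDone, decide_eq_true_eq, lt_self_iff_false, eq_self_iff_true, true_and, false_or, and_true, or_false, false_and, and_false, not_false_eq_true, not_true]; try omega
        rw [valAt_grid n i j i j h0i h0j, if_neg hnd0]
        apply List.filter_congr
        intro p hp
        obtain ⟨p1, p2⟩ := p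
        simp only [List.mem_cons, List.not_mem_nil, or_false, Prod.mk.injEq] at hp
        have hd : pvDone i j (p1, p2) = true := by
          simp only [pvDone, decide_eq_true_eq, lt_self_iff_false, eq_self_iff_true, true_and, false_or, and_true, or_false, false_and, and_false, not_false_eq_true, not_true]; try omega
        rw [hd, Bool.and_true]
      have hPmem : ∀ x : Int × Int, x ∈ [(i-1, j), (i-1, j+1), (i, j-1)].filter (pvInb n) →
          x = (i-1, j) ∨ x = (i-1, j+1) ∨ x = (i, j-1) := by
        intro x hx
        simpa using (List.mem_filter.mp hx).1
      have hnm1 : ((i+1, j) : Int × Int) ∉ [(i-1, j), (i-1, j+1), (i, j-1)].filter (pvInb n) := by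
        intro hm
        have hmP := hm
        rcases hPmem _ hmP with h | h | h <;> (rw [Prod.mk.injEq] at h; omega)
      have v1 : (blkG (i + 1 < n) (valAt n i j) (i, j) (i+1, j)) (i, j) = [(i-1, j), (i-1, j+1), (i, j-1)].filter (pvInb n) ++ (if i + 1 < n then [((i+1, j) : Int × Int)] else []) := by
        rw [blkG_node (by intro h; rw [Prod.mk.injEq] at h; omega), hP]
        exact cond_append hnm1
      have hnm2 : ((i+1, j-1) : Int × Int) ∉ [(i-1, j), (i-1, j+1), (i, j-1)].filter (pvInb n) ++ (if i + 1 < n then [((i+1, j) : Int × Int)] else []) := by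
        intro hm
        simp only [List.mem_append] at hm
        rcases hm with (hmP | hmA1)
        · rcases hPmem _ hmP with h | h | h <;> (rw [Prod.mk.injEq] at h; omega)
        · obtain ⟨-, h⟩ := mem_ite_singleton.mp hmA1
          rw [Prod.mk.injEq] at h; omega
      have v2 : (blkG (i + 1 < n ∧ j - 1 ≥ 0) (blkG (i + 1 < n) (valAt n i j) (i, j) (i+1, j)) (i, j) (i+1, j-1)) (i, j) = [(i-1, j), (i-1, j+1), (i, j-1)].filter (pvInb n) ++ (if i + 1 < n then [((i+1, j) : Int × Int)] else []) ++ (if i + 1 < n ∧ j - 1 ≥ 0 then [((i+1, j-1) : Int × Int)] else []) := by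
        rw [blkG_node (by intro h; rw [Prod.mk.injEq] at h; omega), v1]
        exact cond_append hnm2
      have hnm3 : ((i, j+1) : Int × Int) ∉ [(i-1, j), (i-1, j+1), (i, j-1)].filter (pvInb n) ++ (if i + 1 < n then [((i+1, j) : Int × Int)] else []) ++ (if i + 1 < n ∧ j - 1 ≥ 0 then [((i+1, j-1) : Int × Int)] else []) := by
        intro hm
        simp only [List.mem_append] at hm
        rcases hm with ((hmP | hmA1) | hmA2)
        · rcases hPmem _ hmP with h | h | h <;> (rw [Prod.mk.injEq] at h; omega)
        · obtain ⟨-, h⟩ := mem_ite_singleton.mp hmA1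
          rw [Prod.mk.injEq] at h; omega
        · obtain ⟨-, h⟩ := mem_ite_singleton.mp hmA2
          rw [Prod.mk.injEq] at h; omega
      have v3 : (blkG (j + 1 < n) (blkG (i + 1 < n ∧ j - 1 ≥ 0) (blkG (i + 1 < n) (valAt n i j) (i, j) (i+1, j)) (i, j) (i+1, j-1)) (i, j) (i, j+1)) (i, j) = [(i-1, j), (i-1, j+1), (i, j-1)].filter (pvInb n) ++ (if i + 1 < n then [((i+1, j) : Int × Int)] else []) ++ (if i + 1 < n ∧ j - 1 ≥ 0 then [((i+1, j-1) : Int × Int)] else []) ++ (if j + 1 < n then [((i, j+1) : Int × Int)] else []) := by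
        rw [blkG_node (by intro h; rw [Prod.mk.injEq] at h; omega), v2]
        exact cond_append hnm3
      have v4 : (blkG (i - 1 ≥ 0) (blkG (j + 1 < n) (blkG (i + 1 < n ∧ j - 1 ≥ 0) (blkG (i + 1 < n) (valAt n i j) (i, j) (i+1, j)) (i, j) (i+1, j-1)) (i, j) (i, j+1)) (i, j) (i-1, j)) (i, j) = [(i-1, j), (i-1, j+1), (i, j-1)].filter (pvInb n) ++ (if i + 1 < n then [((i+1, j) : Int × Int)] else []) ++ (if i + 1 < n ∧ j - 1 ≥ 0 then [((i+1, j-1) : Int × Int)] else []) ++ (if j + 1 < n then [((i, j+1) : Int × Int)] else []) := by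
        rw [blkG_node (by intro h; rw [Prod.mk.injEq] at h; omega), v3]
        exact cond_noop (fun hc => List.mem_append_left _ (List.mem_append_left _ (List.mem_append_left _ (List.mem_filter.mpr ⟨by simp,
          by simp only [pvInb, decide_eq_true_eq, lt_self_iff_false, eq_self_iff_true, true_and, false_or, and_true, or_false, false_and, and_false, not_false_eq_true, not_true]; try omega⟩))))
      have v5 : (blkG (j - 1 ≥ 0) (blkG (i - 1 ≥ 0) (blkG (j + 1 < n) (blkG (i + 1 < n ∧ j - 1 ≥ 0) (blkG (i + 1 < n) (valAt n i j) (i, j) (i+1, j)) (i, j) (i+1, j-1)) (i, j) (i, j+1)) (i, j) (i-1, j)) (i, j) (i, j-1)) (i, j) = [(i-1, j), (i-1, j+1), (i, j-1)].filter (pvInb n) ++ (if i + 1 < n then [((i+1, j) : Int × Int)] else []) ++ (if i + 1 < n ∧ j - 1 ≥ 0 then [((i+1, j-1) : Int × Int)] else []) ++ (if j + 1 < n then [((i, j+1) : Int × Int)] else []) := by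
        rw [blkG_node (by intro h; rw [Prod.mk.injEq] at h; omega), v4]
        exact cond_noop (fun hc => List.mem_append_left _ (List.mem_append_left _ (List.mem_append_left _ (List.mem_filter.mpr ⟨by simp,
          by simp only [pvInb, decide_eq_true_eq, lt_self_iff_false, eq_self_iff_true, true_and, false_or, and_true, or_false, false_and, and_false, not_false_eq_true, not_true]; try omega⟩))))
      have v6 : (blkG (i - 1 ≥ 0 ∧ j + 1 < n) (blkG (j - 1 ≥ 0) (blkG (i - 1 ≥ 0) (blkG (j + 1 < n) (blkG (i + 1 < n ∧ j - 1 ≥ 0) (blkG (i + 1 < n) (valAt n i j) (i, j) (i+1, j)) (i, j) (i+1, j-1)) (i, j) (i, j+1)) (i, j) (i-1, j)) (i, j) (i, j-1)) (i, j) (i-1, j+1)) (i, j) = [(i-1, j), (i-1, j+1), (i, j-1)].filter (pvInb n) ++ (if i + 1 < n then [((i+1, j) : Int × Int)] else []) ++ (if i + 1 < n ∧ j - 1 ≥ 0 then [((i+1, j-1) : Int × Int)] else []) ++ (if j + 1 < n then [((i, j+1) : Int × Int)] else []) := by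
        rw [blkG_node (by intro h; rw [Prod.mk.injEq] at h; omega), v5]
        exact cond_noop (fun hc => List.mem_append_left _ (List.mem_append_left _ (List.mem_append_left _ (List.mem_filter.mpr ⟨by simp,
          by simp only [pvInb, decide_eq_true_eq, lt_self_iff_false, eq_self_iff_true, true_and, false_or, and_true, or_false, false_and, and_false, not_false_eq_true, not_true]; try omega⟩))))
      have hnm7 : (pvL : Int × Int) ∉ [(i-1, j), (i-1, j+1), (i, j-1)].filter (pvInb n) ++ (if i + 1 < n then [((i+1, j) : Int × Int)] else []) ++ (if i + 1 < n ∧ j - 1 ≥ 0 then [((i+1, j-1) : Int × Int)] else []) ++ (if j + 1 < n then [((i, j+1) : Int × Int)] else []) := by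
        intro hm
        simp only [List.mem_append] at hm
        rcases hm with (((hmP | hmA1) | hmA2) | hmA3)
        · rcases hPmem _ hmP with h | h | h <;> (rw [pvL] at h; rw [Prod.mk.injEq] at h; omega)
        · obtain ⟨-, h⟩ := mem_ite_singleton.mp hmA1
          rw [pvL] at h; rw [Prod.mk.injEq] at h; omega
        · obtain ⟨-, h⟩ := mem_ite_singleton.mp hmA2
          rw [pvL] at h; rw [Prod.mk.injEq] at h; omega
        · obtain ⟨-, h⟩ := mem_ite_singleton.mp hmA3
          rw [pvL] at h; rw [Prod.mk.injEq] at h; omega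
      have v7 : (blkG (j = 0) (blkG (i - 1 ≥ 0 ∧ j + 1 < n) (blkG (j - 1 ≥ 0) (blkG (i - 1 ≥ 0) (blkG (j + 1 < n) (blkG (i + 1 < n ∧ j - 1 ≥ 0) (blkG (i + 1 < n) (valAt n i j) (i, j) (i+1, j)) (i, j) (i+1, j-1)) (i, j) (i, j+1)) (i, j) (i-1, j)) (i, j) (i, j-1)) (i, j) (i-1, j+1)) (i, j) pvL) (i, j) = [(i-1, j), (i-1, j+1), (i, j-1)].filter (pvInb n) ++ (if i + 1 < n then [((i+1, j) : Int × Int)] else []) ++ (if i + 1 < n ∧ j - 1 ≥ 0 then [((i+1, j-1) : Int × Int)] else []) ++ (if j + 1 < n then [((i, j+1) : Int × Int)] else []) ++ (if j = 0 then [pvL] else []) := by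
        rw [blkG_node (by intro h; rw [pvL] at h; rw [Prod.mk.injEq] at h; omega), v6]
        exact cond_append hnm7
      have hnm8 : (pvR : Int × Int) ∉ [(i-1, j), (i-1, j+1), (i, j-1)].filter (pvInb n) ++ (if i + 1 < n then [((i+1, j) : Int × Int)] else []) ++ (if i + 1 < n ∧ j - 1 ≥ 0 then [((i+1, j-1) : Int × Int)] else []) ++ (if j + 1 < n then [((i, j+1) : Int × Int)] else []) ++ (if j = 0 then [pvL] else []) := by
        intro hm
        simp only [List.mem_append] at hm
        rcases hm with ((((hmP | hmA1) | hmA2) | hmA3) | hmA4)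
        · rcases hPmem _ hmP with h | h | h <;> (rw [pvR] at h; rw [Prod.mk.injEq] at h; omega)
        · obtain ⟨-, h⟩ := mem_ite_singleton.mp hmA1
          rw [pvR] at h; rw [Prod.mk.injEq] at h; omega
        · obtain ⟨-, h⟩ := mem_ite_singleton.mp hmA2
          rw [pvR] at h; rw [Prod.mk.injEq] at h; omega
        · obtain ⟨-, h⟩ := mem_ite_singleton.mp hmA3
          rw [pvR] at h; rw [Prod.mk.injEq] at h; omega
        · obtain ⟨-, h⟩ := mem_ite_singleton.mp hmA4
          exact absurd h (by decide)
      have v8 : (blkG (j = n - 1) (blkG (j = 0) (blkG (i - 1 ≥ 0 ∧ j + 1 < n) (blkG (j - 1 ≥ 0) (blkG (i - 1 ≥ 0) (blkG (j + 1 < n) (blkG (i + 1 < n ∧ j - 1 ≥ 0) (blkG (i + 1 < n) (valAt n i j) (i, j) (i+1, j)) (i, j) (i+1, j-1)) (i, j) (i, j+1)) (i, j) (i-1, j)) (i, j) (i, j-1)) (i, j) (i-1, j+1)) (i, j) pvL) (i, j) pvR) (i, j) = [(i-1, j), (i-1, j+1), (i, j-1)].filter (pvInb n) ++ (if i + 1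 < n then [((i+1, j) : Int × Int)] else []) ++ (if i + 1 < n ∧ j - 1 ≥ 0 then [((i+1, j-1) : Int × Int)] else []) ++ (if j + 1 < n then [((i, j+1) : Int × Int)] else []) ++ (if j = 0 then [pvL] else []) ++ (if j = n - 1 then [pvR] else []) := by
        rw [blkG_node (by intro h; rw [pvR] at h; rw [Prod.mk.injEq] at h; omega), v7]
        exact cond_append hnm8
      have hnm9 : (pvT : Int × Int) ∉ [(i-1, j), (i-1, j+1), (i, j-1)].filter (pvInb n) ++ (if i + 1 < n then [((i+1, j) : Int × Int)] else []) ++ (if i + 1 < n ∧ j - 1 ≥ 0 then [((i+1, j-1) : Int × Int)] else []) ++ (if j + 1 < n then [((i, j+1) : Int × Int)] else []) ++ (if j = 0 then [pvL] else []) ++ (if j = n - 1 then [pvR] else []) := by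
        intro hm
        simp only [List.mem_append] at hm
        rcases hm with (((((hmP | hmA1) | hmA2) | hmA3) | hmA4) | hmA5)
        · rcases hPmem _ hmP with h | h | h <;> (rw [pvT] at h; rw [Prod.mk.injEq] at h; omega)
        · obtain ⟨-, h⟩ := mem_ite_singleton.mp hmA1
          rw [pvT] at h; rw [Prod.mk.injEq] at h; omega
        · obtain ⟨-, h⟩ := mem_ite_singleton.mp hmA2
          rw [pvT] at h; rw [Prod.mk.injEq] at h; omega
        · obtain ⟨-, h⟩ := mem_ite_singleton.mp hmA3
          rw [pvT] at h; rw [Prod.mk.injEq] at h; omega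
        · obtain ⟨-, h⟩ := mem_ite_singleton.mp hmA4
          exact absurd h (by decide)
        · obtain ⟨-, h⟩ := mem_ite_singleton.mp hmA5
          exact absurd h (by decide)
      have v9 : (blkG (i = 0) (blkG (j = n - 1) (blkG (j = 0) (blkG (i - 1 ≥ 0 ∧ j + 1 < n) (blkG (j - 1 ≥ 0) (blkG (i - 1 ≥ 0) (blkG (j + 1 < n) (blkG (i + 1 < n ∧ j - 1 ≥ 0) (blkG (i + 1 < n) (valAt n i j) (i, j) (i+1, j)) (i, j) (i+1, j-1)) (i, j) (i, j+1)) (i, j) (i-1, j)) (i, j) (i, j-1)) (i, j) (i-1, j+1)) (i, j) pvL) (i, j) pvR) (i, j) pvT) (i, j) = [(i-1, j), (i-1, j+1), (i, j-1)].filter (pvInb n) ++ (if i + 1 < n then [((i+1, j) : Int × Int)] else []) ++ (if i + 1 < n ∧ j - 1 ≥ 0 then [((i+1, j-1) : Int × Int)] else []) ++ (if j + 1 < n then [((i, j+1) : Int × Int)] else []) ++ (if j = 0 then [pvL] else []) ++ (if j = n - 1 then [pvR] else []) ++ (if i = 0 then [pvT] else []) := by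
        rw [blkG_node (by intro h; rw [pvT] at h; rw [Prod.mk.injEq] at h; omega), v8]
        exact cond_append hnm9
      have hnm10 : (pvB : Int × Int) ∉ [(i-1, j), (i-1, j+1), (i, j-1)].filter (pvInb n) ++ (if i + 1 < n then [((i+1, j) : Int × Int)] else []) ++ (if i + 1 < n ∧ j - 1 ≥ 0 then [((i+1, j-1) : Int × Int)] else []) ++ (if j + 1 < n then [((i, j+1) : Int × Int)] else []) ++ (if j = 0 then [pvL] else []) ++ (if j = n - 1 then [pvR] else []) ++ (if i = 0 then [pvT] else []) := by
        intro hm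
        simp only [List.mem_append] at hm
        rcases hm with ((((((hmP | hmA1) | hmA2) | hmA3) | hmA4) | hmA5) | hmA6)
        · rcases hPmem _ hmP with h | h | h <;> (rw [pvB] at h; rw [Prod.mk.injEq] at h; omega)
        · obtain ⟨-, h⟩ := mem_ite_singleton.mp hmA1
          rw [pvB] at h; rw [Prod.mk.injEq] at h; omega
        · obtain ⟨-, h⟩ := mem_ite_singleton.mp hmA2
          rw [pvB] at h; rw [Prod.mk.injEq] at h; omega
        · obtain ⟨-, h⟩ := mem_ite_singleton.mp hmA3
          rw [pvB] at h; rw [Prod.mk.injEq] at h; omega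
        · obtain ⟨-, h⟩ := mem_ite_singleton.mp hmA4
          exact absurd h (by decide)
        · obtain ⟨-, h⟩ := mem_ite_singleton.mp hmA5
          exact absurd h (by decide)
        · obtain ⟨-, h⟩ := mem_ite_singleton.mp hmA6
          exact absurd h (by decide)
      have v10 : (blkG (i = n - 1) (blkG (i = 0) (blkG (j = n - 1) (blkG (j = 0) (blkG (i - 1 ≥ 0 ∧ j + 1 < n) (blkG (j - 1 ≥ 0) (blkG (i - 1 ≥ 0) (blkG (j + 1 < n) (blkG (i + 1 < n ∧ j - 1 ≥ 0) (blkG (i + 1 < n) (valAt n i j) (i, j) (i+1, j)) (i, j) (i+1, j-1)) (i, j) (i, j+1)) (i, j) (i-1, j)) (i, j) (i, j-1)) (i, j) (i-1, j+1)) (i, j) pvL) (i, j) pvR) (i, j) pvT) (i, j) pvB) (i, j) = [(i-1, j), (i-1, j+1), (i, j-1)].filter (pvInb n) ++ (if i + 1 < n then [((i+1, j) : Int × Int)] else []) ++ (if i + 1 < n ∧ j - 1 ≥ 0 then [((i+1, j-1) : Int × Int)] else []) ++ (if j + 1 < n then [((i, j+1) : Int × Int)] else []) ++ (if j = 0 then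 [pvL] else []) ++ (if j = n - 1 then [pvR] else []) ++ (if i = 0 then [pvT] else []) ++ (if i = n - 1 then [pvB] else []) := by
        rw [blkG_node (by intro h; rw [pvB] at h; rw [Prod.mk.injEq] at h; omega), v9]
        exact cond_append hnm10
      have hdn : pvDone i (j+1) ((i : Int), j) = true := by
        simp only [pvDone, decide_eq_true_eq, lt_self_iff_false, eq_self_iff_true, true_and, false_or, and_true, or_false, false_and, and_false, not_false_eq_true, not_true]; try omega
      rw [v10, valAt_grid n i (j+1) i j h0i h0j, if_pos hdn]
      rw [pvNbrs]
      rw [show ([(i-1, j), (i-1, j+1), (i, j-1), (i+1, j), (i+1, j-1), (i, j+1)] : List (Int × Int))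
          = [(i-1, j), (i-1, j+1), (i, j-1)] ++ [(i+1, j), (i+1, j-1), (i, j+1)] from rfl,
        List.filter_append]
      have hpred : (fun p : Int × Int => decide (0 ≤ p.1 ∧ p.1 < n ∧ 0 ≤ p.2 ∧ p.2 < n)) = pvInb n := rfl
      rw [hpred]
      have hsuccs : ([((i+1 : Int), j), (i+1, j-1), (i, j+1)] : List (Int × Int)).filter (pvInb n) =
          ((if i + 1 < n then [((i+1, j) : Int × Int)] else [])
            ++ (if i + 1 < n ∧ j - 1 ≥ 0 then [((i+1, j-1) : Int × Int)] else []))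
            ++ (if j + 1 < n then [((i, j+1) : Int × Int)] else []) := by
        have q1 : pvInb n ((i+1 : Int), j) = decide (i + 1 < n) := by
          simp only [pvInb, decide_eq_decide]; omega
        have q2 : pvInb n ((i+1 : Int), j-1) = decide (i + 1 < n ∧ j - 1 ≥ 0) := by
          simp only [pvInb, decide_eq_decide]; omega
        have q3 : pvInb n ((i : Int), j+1) = decide (j + 1 < n) := by
          simp only [pvInb, decide_eq_decide]; omega
        rw [List.filter_cons, List.filter_cons, List.filter_cons, List.filter_nil, q1, q2, q3]
        by_cases c1 : i + 1 < n <;> by_cases c2 : j - 1 ≥ 0 <;> by_cases c3 : j + 1 < n <;>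
          simp [c1, c2, c3] <;> (try (split <;> simp)) <;> omega
      rw [hsuccs]
      simp only [List.append_assoc]
    by_cases e1 : ((a, b) : Int × Int) = (i+1, j)
    · rw [Prod.mk.injEq] at e1
      obtain ⟨h1, h2⟩ := e1
      subst a
      subst b
      rw [blkG_of_ne (by intro h; rw [Prod.mk.injEq] at h; omega) (by intro h; rw [pvB] at h; rw [Prod.mk.injEq] at h; omega),
          blkG_of_ne (by intro h; rw [Prod.mk.injEq] at h; omega) (by intro h; rw [pvT] at h; rw [Prod.mk.injEq] at h; omega),
          blkG_of_ne (by intro h; rw [Prod.mk.injEq] at h; omega) (by intro h; rw [pvR] at h; rw [Prod.mk.injEq] at h; omega),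
          blkG_of_ne (by intro h; rw [Prod.mk.injEq] at h; omega) (by intro h; rw [pvL] at h; rw [Prod.mk.injEq] at h; omega),
          blkG_of_ne (by intro h; rw [Prod.mk.injEq] at h; omega) (by intro h; rw [Prod.mk.injEq] at h; omega),
          blkG_of_ne (by intro h; rw [Prod.mk.injEq] at h; omega) (by intro h; rw [Prod.mk.injEq] at h; omega),
          blkG_of_ne (by intro h; rw [Prod.mk.injEq] at h; omega) (by intro h; rw [Prod.mk.injEq] at h; omega),
          blkG_of_ne (by intro h; rw [Prod.mk.injEq] at h; omega) (by intro h; rw [Prod.mk.injEq] at h; omega),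
          blkG_of_ne (by intro h; rw [Prod.mk.injEq] at h; omega) (by intro h; rw [Prod.mk.injEq] at h; omega),
          blkG_p (by intro h; rw [Prod.mk.injEq] at h; omega)]
      rw [if_pos han]
      have hgk : valAt n i j ((i+1 : Int), j) = [] := by
        have hnd1 : ¬(pvDone i j ((i+1 : Int), j) = true) := by
          simp only [pvDone, decide_eq_true_eq, lt_self_iff_false, eq_self_iff_true, true_and, false_or, and_true, or_false, false_and, and_false, not_false_eq_true, not_true]; try omega
        rw [valAt_grid n i j (i+1) j (by omega) hb0, if_neg hnd1]
        apply List.filter_eq_nil_iff.mpr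
        intro p hp
        obtain ⟨p1, p2⟩ := p
        simp only [List.mem_cons, List.not_mem_nil, or_false, Prod.mk.injEq] at hp
        simp only [pvInb, pvDone, Bool.and_eq_true, decide_eq_true_eq, lt_self_iff_false, eq_self_iff_true, true_and, false_or, and_true, or_false, false_and, and_false, not_false_eq_true, not_true]
        try omega
      have hmn : ¬(((i : Int), j) ∈ ([] : List (Int × Int))) := by simp
      rw [hgk, if_neg hmn]
      have hnd2 : ¬(pvDone i (j+1) ((i+1 : Int), j) = true) := by
        simp only [pvDone, decide_eq_true_eq, lt_self_iff_false, eq_self_iff_true, true_and, false_or, and_true, or_false, false_and, and_false, not_false_eq_true, not_true]; try omega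
      rw [valAt_grid n i (j+1) (i+1) j (by omega) hb0, if_neg hnd2,
        show ((i : Int) + 1 - 1) = i from by ring]
      have r1 : (pvInb n ((i : Int), j) && pvDone i (j+1) ((i : Int), j)) = true := by
        simp only [pvInb, pvDone, Bool.and_eq_true, decide_eq_true_eq, lt_self_iff_false, eq_self_iff_true, true_and, false_or, and_true, or_false, false_and, and_false, not_false_eq_true, not_true]; try omega
      have r2 : (pvInb n ((i : Int), j+1) && pvDone i (j+1) ((i : Int), j+1)) = false := by
        simp only [pvInb, pvDone, ← Bool.decide_and, decide_eq_false_iff_not, lt_self_iff_false, eq_self_iff_true, true_and, false_or, and_true, or_false, false_and, and_false, not_false_eq_true, not_true]; try omega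
      have r3 : (pvInb n ((i+1 : Int), j-1) && pvDone i (j+1) ((i+1 : Int), j-1)) = false := by
        simp only [pvInb, pvDone, ← Bool.decide_and, decide_eq_false_iff_not, lt_self_iff_false, eq_self_iff_true, true_and, false_or, and_true, or_false, false_and, and_false, not_false_eq_true, not_true]; try omega
      simp only [List.filter_cons, List.filter_nil, r1, r2, r3]
      simp
    by_cases e2 : ((a, b) : Int × Int) = (i+1, j-1)
    · rw [Prod.mk.injEq] at e2
      obtain ⟨h1, h2⟩ := e2
      subst a
      subst b
      rw [blkG_of_ne (by intro h; rw [Prod.mk.injEq] at h; omega) (by intro h; rw [pvB] at h; rw [Prod.mk.injEq] at h; omega),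
          blkG_of_ne (by intro h; rw [Prod.mk.injEq] at h; omega) (by intro h; rw [pvT] at h; rw [Prod.mk.injEq] at h; omega),
          blkG_of_ne (by intro h; rw [Prod.mk.injEq] at h; omega) (by intro h; rw [pvR] at h; rw [Prod.mk.injEq] at h; omega),
          blkG_of_ne (by intro h; rw [Prod.mk.injEq] at h; omega) (by intro h; rw [pvL] at h; rw [Prod.mk.injEq] at h; omega),
          blkG_of_ne (by intro h; rw [Prod.mk.injEq] at h; omega) (by intro h; rw [Prod.mk.injEq] at h; omega),
          blkG_of_ne (by intro h; rw [Prod.mk.injEq] at h; omega) (by intro h; rw [Prod.mk.injEq] at h; omega),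
          blkG_of_ne (by intro h; rw [Prod.mk.injEq] at h; omega) (by intro h; rw [Prod.mk.injEq] at h; omega),
          blkG_of_ne (by intro h; rw [Prod.mk.injEq] at h; omega) (by intro h; rw [Prod.mk.injEq] at h; omega),
          blkG_p (by intro h; rw [Prod.mk.injEq] at h; omega),
          blkG_of_ne (by intro h; rw [Prod.mk.injEq] at h; omega) (by intro h; rw [Prod.mk.injEq] at h; omega)]
      rw [if_pos ⟨han, hb0⟩]
      have hgk : valAt n i j ((i+1 : Int), j-1) = [((i, j-1) : Int × Int)] := by
        have hnd1 : ¬(pvDone i j ((i+1 : Int), j-1) = true) := by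
          simp only [pvDone, decide_eq_true_eq, lt_self_iff_false, eq_self_iff_true, true_and, false_or, and_true, or_false, false_and, and_false, not_false_eq_true, not_true]; try omega
        rw [valAt_grid n i j (i+1) (j-1) (by omega) hb0, if_neg hnd1,
          show ((i : Int) + 1 - 1) = i from by ring,
          show ((j : Int) - 1 + 1) = j from by ring]
        have r1 : (pvInb n ((i : Int), j-1) && pvDone i j ((i : Int), j-1)) = true := by
          simp only [pvInb, pvDone, Bool.and_eq_true, decide_eq_true_eq, lt_self_iff_false, eq_self_iff_true, true_and, false_or, and_true, or_false, false_and, and_false, not_false_eq_true, not_true]; try omega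
        have r2 : (pvInb n ((i : Int), j) && pvDone i j ((i : Int), j)) = false := by
          simp only [pvInb, pvDone, ← Bool.decide_and, decide_eq_false_iff_not, lt_self_iff_false, eq_self_iff_true, true_and, false_or, and_true, or_false, false_and, and_false, not_false_eq_true, not_true]; try omega
        have r3 : (pvInb n ((i+1 : Int), j-1-1) && pvDone i j ((i+1 : Int), j-1-1)) = false := by
          simp only [pvInb, pvDone, ← Bool.decide_and, decide_eq_false_iff_not, lt_self_iff_false, eq_self_iff_true, true_and, false_or, and_true, or_false, false_and, and_false, not_false_eq_true, not_true]; try omega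
        simp only [List.filter_cons, List.filter_nil, r1, r2, r3]
        simp
      have hmn : ¬(((i : Int), j) ∈ [((i, j-1) : Int × Int)]) := by
        intro hm
        simp only [List.mem_cons, List.not_mem_nil, Prod.mk.injEq, or_false] at hm
        omega
      rw [hgk, if_neg hmn]
      have hnd2 : ¬(pvDone i (j+1) ((i+1 : Int), j-1) = true) := by
        simp only [pvDone, decide_eq_true_eq, lt_self_iff_false, eq_self_iff_true, true_and, false_or, and_true, or_false, false_and, and_false, not_false_eq_true, not_true]; try omega
      rw [valAt_grid n i (j+1) (i+1) (j-1) (by omega) hb0, if_neg hnd2,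
        show ((i : Int) + 1 - 1) = i from by ring,
        show ((j : Int) - 1 + 1) = j from by ring]
      have r1 : (pvInb n ((i : Int), j-1) && pvDone i (j+1) ((i : Int), j-1)) = true := by
        simp only [pvInb, pvDone, Bool.and_eq_true, decide_eq_true_eq, lt_self_iff_false, eq_self_iff_true, true_and, false_or, and_true, or_false, false_and, and_false, not_false_eq_true, not_true]; try omega
      have r2 : (pvInb n ((i : Int), j) && pvDone i (j+1) ((i : Int), j)) = true := by
        simp only [pvInb, pvDone, Bool.and_eq_true, decide_eq_true_eq, lt_self_iff_false, eq_self_iff_true, true_and, false_or, and_true, or_false, false_and, and_false, not_false_eq_true, not_true]; try omega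
      have r3 : (pvInb n ((i+1 : Int), j-1-1) && pvDone i (j+1) ((i+1 : Int), j-1-1)) = false := by
        simp only [pvInb, pvDone, ← Bool.decide_and, decide_eq_false_iff_not, lt_self_iff_false, eq_self_iff_true, true_and, false_or, and_true, or_false, false_and, and_false, not_false_eq_true, not_true]; try omega
      simp only [List.filter_cons, List.filter_nil, r1, r2, r3]
      simp
    by_cases e3 : ((a, b) : Int × Int) = (i, j+1)
    · rw [Prod.mk.injEq] at e3
      obtain ⟨h1, h2⟩ := e3
      subst a
      subst b
      rw [blkG_of_ne (by intro h; rw [Prod.mk.injEq] at h; omega) (by intro h; rw [pvB] at h; rw [Prod.mk.injEq] at h; omega),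
          blkG_of_ne (by intro h; rw [Prod.mk.injEq] at h; omega) (by intro h; rw [pvT] at h; rw [Prod.mk.injEq] at h; omega),
          blkG_of_ne (by intro h; rw [Prod.mk.injEq] at h; omega) (by intro h; rw [pvR] at h; rw [Prod.mk.injEq] at h; omega),
          blkG_of_ne (by intro h; rw [Prod.mk.injEq] at h; omega) (by intro h; rw [pvL] at h; rw [Prod.mk.injEq] at h; omega),
          blkG_of_ne (by intro h; rw [Prod.mk.injEq] at h; omega) (by intro h; rw [Prod.mk.injEq] at h; omega),
          blkG_of_ne (by intro h; rw [Prod.mk.injEq] at h; omega) (by intro h; rw [Prod.mk.injEq] at h; omega),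
          blkG_of_ne (by intro h; rw [Prod.mk.injEq] at h; omega) (by intro h; rw [Prod.mk.injEq] at h; omega),
          blkG_p (by intro h; rw [Prod.mk.injEq] at h; omega),
          blkG_of_ne (by intro h; rw [Prod.mk.injEq] at h; omega) (by intro h; rw [Prod.mk.injEq] at h; omega),
          blkG_of_ne (by intro h; rw [Prod.mk.injEq] at h; omega) (by intro h; rw [Prod.mk.injEq] at h; omega)]
      rw [if_pos hbn]
      have hnd1 : ¬(pvDone i j ((i : Int), j+1) = true) := by
        simp only [pvDone, decide_eq_true_eq, lt_self_iff_false, eq_self_iff_true, true_and, false_or, and_true, or_false, false_and, and_false, not_false_eq_true, not_true]; try omega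
      have hnd2 : ¬(pvDone i (j+1) ((i : Int), j+1) = true) := by
        simp only [pvDone, decide_eq_true_eq, lt_self_iff_false, eq_self_iff_true, true_and, false_or, and_true, or_false, false_and, and_false, not_false_eq_true, not_true]; try omega
      rw [valAt_grid n i j i (j+1) h0i (by omega), if_neg hnd1,
        valAt_grid n i (j+1) i (j+1) h0i (by omega), if_neg hnd2,
        show ((j : Int) + 1 - 1) = j from by ring]
      have hnm : ((i : Int), j) ∉ [((i-1 : Int), j+1), (i-1, j+1+1), (i, j)].filter
          (fun p => pvInb n p && pvDone i j p) := by
        intro hm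
        have h2 := (List.mem_filter.mp hm).2
        simp only [pvInb, pvDone, Bool.and_eq_true, decide_eq_true_eq, lt_self_iff_false, eq_self_iff_true, true_and, false_or, and_true, or_false, false_and, and_false, not_false_eq_true, not_true] at h2
        try omega
      rw [if_neg hnm]
      rw [show ([((i-1 : Int), j+1), (i-1, j+1+1), (i, j)] : List (Int × Int))
          = [((i-1 : Int), j+1), (i-1, j+1+1)] ++ [((i, j) : Int × Int)] from rfl,
        List.filter_append, List.filter_append]
      have hcong : [((i-1 : Int), j+1), (i-1, j+1+1)].filter (fun p => pvInb n p && pvDone i (j+1) p)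
          = [((i-1 : Int), j+1), (i-1, j+1+1)].filter (fun p => pvInb n p && pvDone i j p) := by
        apply List.filter_congr
        intro p hp
        obtain ⟨p1, p2⟩ := p
        simp only [List.mem_cons, List.not_mem_nil, or_false, Prod.mk.injEq] at hp
        simp only [pvInb, pvDone, ← Bool.decide_and, decide_eq_decide, lt_self_iff_false, eq_self_iff_true, true_and, false_or, and_true, or_false, false_and, and_false, not_false_eq_true, not_true]
        try omega
      rw [hcong]
      have r1 : (pvInb n ((i : Int), j) && pvDone i j ((i : Int), j)) = false := by
        simp only [pvInb, pvDone, ← Bool.decide_and, decide_eq_false_iff_not, lt_self_iff_false, eq_self_iff_true, true_and, false_or, and_true, or_false, false_and, and_false, not_false_eq_true, not_true]; try omega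
      have r2 : (pvInb n ((i : Int), j) && pvDone i (j+1) ((i : Int), j)) = true := by
        simp only [pvInb, pvDone, Bool.and_eq_true, decide_eq_true_eq, lt_self_iff_false, eq_self_iff_true, true_and, false_or, and_true, or_false, false_and, and_false, not_false_eq_true, not_true]; try omega
      simp only [List.filter_cons, List.filter_nil, r1, r2]
      simp
    by_cases e4 : ((a, b) : Int × Int) = (i-1, j)
    · rw [Prod.mk.injEq] at e4
      obtain ⟨h1, h2⟩ := e4
      subst a
      subst b
      rw [blkG_of_ne (by intro h; rw [Prod.mk.injEq] at h; omega) (by intro h; rw [pvB] at h; rw [Prod.mk.injEq] at h; omega),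
          blkG_of_ne (by intro h; rw [Prod.mk.injEq] at h; omega) (by intro h; rw [pvT] at h; rw [Prod.mk.injEq] at h; omega),
          blkG_of_ne (by intro h; rw [Prod.mk.injEq] at h; omega) (by intro h; rw [pvR] at h; rw [Prod.mk.injEq] at h; omega),
          blkG_of_ne (by intro h; rw [Prod.mk.injEq] at h; omega) (by intro h; rw [pvL] at h; rw [Prod.mk.injEq] at h; omega),
          blkG_of_ne (by intro h; rw [Prod.mk.injEq] at h; omega) (by intro h; rw [Prod.mk.injEq] at h; omega),
          blkG_of_ne (by intro h; rw [Prod.mk.injEq] at h; omega) (by intro h; rw [Prod.mk.injEq] at h; omega),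
          blkG_p (by intro h; rw [Prod.mk.injEq] at h; omega),
          blkG_of_ne (by intro h; rw [Prod.mk.injEq] at h; omega) (by intro h; rw [Prod.mk.injEq] at h; omega),
          blkG_of_ne (by intro h; rw [Prod.mk.injEq] at h; omega) (by intro h; rw [Prod.mk.injEq] at h; omega),
          blkG_of_ne (by intro h; rw [Prod.mk.injEq] at h; omega) (by intro h; rw [Prod.mk.injEq] at h; omega)]
      have hp4a : pvDone i j ((i-1 : Int), j) = true := by
        simp only [pvDone, decide_eq_true_eq, lt_self_iff_false, eq_self_iff_true, true_and, false_or, and_true, or_false, false_and, and_false, not_false_eq_true, not_true]; try omega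
      have hp4b : pvDone i (j+1) ((i-1 : Int), j) = true := by
        simp only [pvDone, decide_eq_true_eq, lt_self_iff_false, eq_self_iff_true, true_and, false_or, and_true, or_false, false_and, and_false, not_false_eq_true, not_true]; try omega
      have hgk : valAt n i j ((i-1 : Int), j) = pvNbrs n (i-1) (j) := by
        rw [valAt_grid n i j (i-1) (j) ha0 hb0, if_pos hp4a]
      have hgk' : valAt n i (j+1) ((i-1 : Int), j) = pvNbrs n (i-1) (j) := by
        rw [valAt_grid n i (j+1) (i-1) (j) ha0 hb0, if_pos hp4b]
      rw [hgk, hgk', if_pos (mem_pvNbrs h0i hin h0j hjn (by omega))]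
      split
      · rfl
      · rfl
    by_cases e5 : ((a, b) : Int × Int) = (i, j-1)
    · rw [Prod.mk.injEq] at e5
      obtain ⟨h1, h2⟩ := e5
      subst a
      subst b
      rw [blkG_of_ne (by intro h; rw [Prod.mk.injEq] at h; omega) (by intro h; rw [pvB] at h; rw [Prod.mk.injEq] at h; omega),
          blkG_of_ne (by intro h; rw [Prod.mk.injEq] at h; omega) (by intro h; rw [pvT] at h; rw [Prod.mk.injEq] at h; omega),
          blkG_of_ne (by intro h; rw [Prod.mk.injEq] at h; omega) (by intro h; rw [pvR] at h; rw [Prod.mk.injEq] at h; omega),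
          blkG_of_ne (by intro h; rw [Prod.mk.injEq] at h; omega) (by intro h; rw [pvL] at h; rw [Prod.mk.injEq] at h; omega),
          blkG_of_ne (by intro h; rw [Prod.mk.injEq] at h; omega) (by intro h; rw [Prod.mk.injEq] at h; omega),
          blkG_p (by intro h; rw [Prod.mk.injEq] at h; omega),
          blkG_of_ne (by intro h; rw [Prod.mk.injEq] at h; omega) (by intro h; rw [Prod.mk.injEq] at h; omega),
          blkG_of_ne (by intro h; rw [Prod.mk.injEq] at h; omega) (by intro h; rw [Prod.mk.injEq] at h; omega),
          blkG_of_ne (by intro h; rw [Prod.mk.injEq] at h; omega) (by intro h; rw [Prod.mk.injEq] at h; omega),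
          blkG_of_ne (by intro h; rw [Prod.mk.injEq] at h; omega) (by intro h; rw [Prod.mk.injEq] at h; omega)]
      have hp5a : pvDone i j ((i : Int), j-1) = true := by
        simp only [pvDone, decide_eq_true_eq, lt_self_iff_false, eq_self_iff_true, true_and, false_or, and_true, or_false, false_and, and_false, not_false_eq_true, not_true]; try omega
      have hp5b : pvDone i (j+1) ((i : Int), j-1) = true := by
        simp only [pvDone, decide_eq_true_eq, lt_self_iff_false, eq_self_iff_true, true_and, false_or, and_true, or_false, false_and, and_false, not_false_eq_true, not_true]; try omega
      have hgk : valAt n i j ((i : Int), j-1) = pvNbrs n (i) (j-1) := by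
        rw [valAt_grid n i j (i) (j-1) h0i hb0, if_pos hp5a]
      have hgk' : valAt n i (j+1) ((i : Int), j-1) = pvNbrs n (i) (j-1) := by
        rw [valAt_grid n i (j+1) (i) (j-1) h0i hb0, if_pos hp5b]
      rw [hgk, hgk', if_pos (mem_pvNbrs h0i hin h0j hjn (by omega))]
      split
      · rfl
      · rfl
    by_cases e6 : ((a, b) : Int × Int) = (i-1, j+1)
    · rw [Prod.mk.injEq] at e6
      obtain ⟨h1, h2⟩ := e6
      subst a
      subst b
      rw [blkG_of_ne (by intro h; rw [Prod.mk.injEq] at h; omega) (by intro h; rw [pvB] at h; rw [Prod.mk.injEq] at h; omega),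
          blkG_of_ne (by intro h; rw [Prod.mk.injEq] at h; omega) (by intro h; rw [pvT] at h; rw [Prod.mk.injEq] at h; omega),
          blkG_of_ne (by intro h; rw [Prod.mk.injEq] at h; omega) (by intro h; rw [pvR] at h; rw [Prod.mk.injEq] at h; omega),
          blkG_of_ne (by intro h; rw [Prod.mk.injEq] at h; omega) (by intro h; rw [pvL] at h; rw [Prod.mk.injEq] at h; omega),
          blkG_p (by intro h; rw [Prod.mk.injEq] at h; omega),
          blkG_of_ne (by intro h; rw [Prod.mk.injEq] at h; omega) (by intro h; rw [Prod.mk.injEq] at h; omega),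
          blkG_of_ne (by intro h; rw [Prod.mk.injEq] at h; omega) (by intro h; rw [Prod.mk.injEq] at h; omega),
          blkG_of_ne (by intro h; rw [Prod.mk.injEq] at h; omega) (by intro h; rw [Prod.mk.injEq] at h; omega),
          blkG_of_ne (by intro h; rw [Prod.mk.injEq] at h; omega) (by intro h; rw [Prod.mk.injEq] at h; omega),
          blkG_of_ne (by intro h; rw [Prod.mk.injEq] at h; omega) (by intro h; rw [Prod.mk.injEq] at h; omega)]
      have hp6a : pvDone i j ((i-1 : Int), j+1) = true := by
        simp only [pvDone, decide_eq_true_eq, lt_self_iff_false, eq_self_iff_true, true_and, false_or, and_true, or_false, false_and, and_false, not_false_eq_true, not_true]; try omega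
      have hp6b : pvDone i (j+1) ((i-1 : Int), j+1) = true := by
        simp only [pvDone, decide_eq_true_eq, lt_self_iff_false, eq_self_iff_true, true_and, false_or, and_true, or_false, false_and, and_false, not_false_eq_true, not_true]; try omega
      have hgk : valAt n i j ((i-1 : Int), j+1) = pvNbrs n (i-1) (j+1) := by
        rw [valAt_grid n i j (i-1) (j+1) ha0 (by omega), if_pos hp6a]
      have hgk' : valAt n i (j+1) ((i-1 : Int), j+1) = pvNbrs n (i-1) (j+1) := by
        rw [valAt_grid n i (j+1) (i-1) (j+1) ha0 (by omega), if_pos hp6b]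
      rw [hgk, hgk', if_pos (mem_pvNbrs h0i hin h0j hjn (by omega))]
      split
      · rfl
      · rfl
    have he0 : ¬(a = i ∧ b = j) := fun h => e0 (by rw [h.1, h.2])
    have he1 : ¬(a = i + 1 ∧ b = j) := fun h => e1 (by rw [h.1, h.2])
    have he2 : ¬(a = i + 1 ∧ b = j - 1) := fun h => e2 (by rw [h.1, h.2])
    have he3 : ¬(a = i ∧ b = j + 1) := fun h => e3 (by rw [h.1, h.2])
    rw [blkG_of_ne e0 (by intro h; rw [pvB] at h; rw [Prod.mk.injEq] at h; omega),
        blkG_of_ne e0 (by intro h; rw [pvT] at h; rw [Prod.mk.injEq] at h; omega),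
        blkG_of_ne e0 (by intro h; rw [pvR] at h; rw [Prod.mk.injEq] at h; omega),
        blkG_of_ne e0 (by intro h; rw [pvL] at h; rw [Prod.mk.injEq] at h; omega),
        blkG_of_ne e0 e6,
        blkG_of_ne e0 e5,
        blkG_of_ne e0 e4,
        blkG_of_ne e0 e3,
        blkG_of_ne e0 e2,
        blkG_of_ne e0 e1]
    rw [valAt_grid n i j a b ha0 hb0, valAt_grid n i (j+1) a b ha0 hb0]
    have hd : pvDone i (j+1) (a, b) = pvDone i j (a, b) := by
      simp only [pvDone, decide_eq_decide]; omega
    rw [hd]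
    split
    · rfl
    · apply List.filter_congr
      intro p hp
      obtain ⟨p1, p2⟩ := p
      simp only [List.mem_cons, List.not_mem_nil, or_false, Prod.mk.injEq] at hp
      simp only [pvInb, pvDone, ← Bool.decide_and, decide_eq_decide, lt_self_iff_false, eq_self_iff_true, true_and, false_or, and_true, or_false, false_and, and_false, not_false_eq_true, not_true]
      try omega
  · simp only [List.mem_cons, List.not_mem_nil, or_false] at hv
    rcases hv with rfl | rfl | rfl | rfl
    · -- k = pvL
      rw [blkG_of_ne (by intro h; rw [pvL] at h; rw [Prod.mk.injEq] at h; omega) (by decide),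
        blkG_of_ne (by intro h; rw [pvL] at h; rw [Prod.mk.injEq] at h; omega) (by decide),
        blkG_of_ne (by intro h; rw [pvL] at h; rw [Prod.mk.injEq] at h; omega) (by decide),
        blkG_p (by intro h; rw [pvL] at h; rw [Prod.mk.injEq] at h; omega),
        blkG_of_ne (by intro h; rw [pvL] at h; rw [Prod.mk.injEq] at h; omega) (by intro h; rw [pvL] at h; rw [Prod.mk.injEq] at h; omega),
        blkG_of_ne (by intro h; rw [pvL] at h; rw [Prod.mk.injEq] at h; omega) (by intro h; rw [pvL] at h; rw [Prod.mk.injEq] at h; omega),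
        blkG_of_ne (by intro h; rw [pvL] at h; rw [Prod.mk.injEq] at h; omega) (by intro h; rw [pvL] at h; rw [Prod.mk.injEq] at h; omega),
        blkG_of_ne (by intro h; rw [pvL] at h; rw [Prod.mk.injEq] at h; omega) (by intro h; rw [pvL] at h; rw [Prod.mk.injEq] at h; omega),
        blkG_of_ne (by intro h; rw [pvL] at h; rw [Prod.mk.injEq] at h; omega) (by intro h; rw [pvL] at h; rw [Prod.mk.injEq] at h; omega),
        blkG_of_ne (by intro h; rw [pvL] at h; rw [Prod.mk.injEq] at h; omega) (by intro h; rw [pvL] at h; rw [Prod.mk.injEq] at h; omega)]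
      rw [valAt_L, valAt_L]
      by_cases hj0 : j = 0
      · subst hj0
        rw [if_pos rfl]
        have hnm : ((i : Int), 0) ∉ (borderL n).filter (pvDone i 0) := by
          intro hm
          have h2 := (List.mem_filter.mp hm).2
          simp only [pvDone, decide_eq_true_eq] at h2
          omega
        rw [if_neg hnm]
        have hbL : borderL n = (PySem.List.pyRange 0 n 1).map (fun a => (a, (0:Int))) := rfl
        rw [hbL,
          filter_prefix n i (fun a => (a, (0:Int))) (pvDone i 0) h0i (le_of_lt hin)
            (fun a h1 h2 => by simp only [pvDone, decide_eq_decide]; omega),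
          filter_prefix n (i+1) (fun a => (a, (0:Int))) (pvDone i (0+1)) (by omega) (by omega)
            (fun a h1 h2 => by simp only [pvDone, decide_eq_decide]; omega),
          PySem.List.pyRange_one_succ_right h0i, List.map_append]
        rfl
      · rw [if_neg hj0]
        apply List.filter_congr
        intro p hp
        obtain ⟨p1, p2⟩ := p
        obtain ⟨⟨hq1, hq2⟩, rfl⟩ := mem_borderL.mp hp
        simp only [pvDone, decide_eq_decide]
        omega
    · -- k = pvR
      rw [blkG_of_ne (by intro h; rw [pvR] at h; rw [Prod.mk.injEq] at h; omega) (by decide),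
        blkG_of_ne (by intro h; rw [pvR] at h; rw [Prod.mk.injEq] at h; omega) (by decide),
        blkG_p (by intro h; rw [pvR] at h; rw [Prod.mk.injEq] at h; omega),
        blkG_of_ne (by intro h; rw [pvR] at h; rw [Prod.mk.injEq] at h; omega) (by decide),
        blkG_of_ne (by intro h; rw [pvR] at h; rw [Prod.mk.injEq] at h; omega) (by intro h; rw [pvR] at h; rw [Prod.mk.injEq] at h; omega),
        blkG_of_ne (by intro h; rw [pvR] at h; rw [Prod.mk.injEq] at h; omega) (by intro h; rw [pvR] at h; rw [Prod.mk.injEq] at h; omega),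
        blkG_of_ne (by intro h; rw [pvR] at h; rw [Prod.mk.injEq] at h; omega) (by intro h; rw [pvR] at h; rw [Prod.mk.injEq] at h; omega),
        blkG_of_ne (by intro h; rw [pvR] at h; rw [Prod.mk.injEq] at h; omega) (by intro h; rw [pvR] at h; rw [Prod.mk.injEq] at h; omega),
        blkG_of_ne (by intro h; rw [pvR] at h; rw [Prod.mk.injEq] at h; omega) (by intro h; rw [pvR] at h; rw [Prod.mk.injEq] at h; omega),
        blkG_of_ne (by intro h; rw [pvR] at h; rw [Prod.mk.injEq] at h; omega) (by intro h; rw [pvR] at h; rw [Prod.mk.injEq] at h; omega)]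
      rw [valAt_R, valAt_R]
      by_cases hj1 : j = n - 1
      · subst hj1
        rw [if_pos rfl]
        have hnm : ((i : Int), n - 1) ∉ (borderR n).filter (pvDone i (n - 1)) := by
          intro hm
          have h2 := (List.mem_filter.mp hm).2
          simp only [pvDone, decide_eq_true_eq] at h2
          omega
        rw [if_neg hnm]
        have hbR : borderR n = (PySem.List.pyRange 0 n 1).map (fun a => (a, n - 1)) := rfl
        rw [hbR,
          filter_prefix n i (fun a => (a, n - 1)) (pvDone i (n - 1)) h0i (le_of_lt hin)
            (fun a h1 h2 => by simp only [pvDone, decide_eq_decide]; omega),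
          filter_prefix n (i+1) (fun a => (a, n - 1)) (pvDone i (n - 1 + 1)) (by omega) (by omega)
            (fun a h1 h2 => by simp only [pvDone, decide_eq_decide]; omega),
          PySem.List.pyRange_one_succ_right h0i, List.map_append]
        rfl
      · rw [if_neg hj1]
        apply List.filter_congr
        intro p hp
        obtain ⟨p1, p2⟩ := p
        obtain ⟨⟨hq1, hq2⟩, rfl⟩ := mem_borderR.mp hp
        simp only [pvDone, decide_eq_decide]
        omega
    · -- k = pvT
      rw [blkG_of_ne (by intro h; rw [pvT] at h; rw [Prod.mk.injEq] at h; omega) (by decide),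
        blkG_p (by intro h; rw [pvT] at h; rw [Prod.mk.injEq] at h; omega),
        blkG_of_ne (by intro h; rw [pvT] at h; rw [Prod.mk.injEq] at h; omega) (by decide),
        blkG_of_ne (by intro h; rw [pvT] at h; rw [Prod.mk.injEq] at h; omega) (by decide),
        blkG_of_ne (by intro h; rw [pvT] at h; rw [Prod.mk.injEq] at h; omega) (by intro h; rw [pvT] at h; rw [Prod.mk.injEq] at h; omega),
        blkG_of_ne (by intro h; rw [pvT] at h; rw [Prod.mk.injEq] at h; omega) (by intro h; rw [pvT] at h; rw [Prod.mk.injEq] at h; omega),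
        blkG_of_ne (by intro h; rw [pvT] at h; rw [Prod.mk.injEq] at h; omega) (by intro h; rw [pvT] at h; rw [Prod.mk.injEq] at h; omega),
        blkG_of_ne (by intro h; rw [pvT] at h; rw [Prod.mk.injEq] at h; omega) (by intro h; rw [pvT] at h; rw [Prod.mk.injEq] at h; omega),
        blkG_of_ne (by intro h; rw [pvT] at h; rw [Prod.mk.injEq] at h; omega) (by intro h; rw [pvT] at h; rw [Prod.mk.injEq] at h; omega),
        blkG_of_ne (by intro h; rw [pvT] at h; rw [Prod.mk.injEq] at h; omega) (by intro h; rw [pvT] at h; rw [Prod.mk.injEq] at h; omega)]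
      rw [valAt_T, valAt_T]
      by_cases hi0 : i = 0
      · subst hi0
        rw [if_pos rfl]
        have hnm : ((0 : Int), j) ∉ (borderT n).filter (pvDone 0 j) := by
          intro hm
          have h2 := (List.mem_filter.mp hm).2
          simp only [pvDone, decide_eq_true_eq] at h2
          omega
        rw [if_neg hnm]
        have hbT : borderT n = (PySem.List.pyRange 0 n 1).map (fun b => ((0:Int), b)) := rfl
        rw [hbT,
          filter_prefix n j (fun b => ((0:Int), b)) (pvDone 0 j) h0j (le_of_lt hjn)
            (fun a h1 h2 => by
              simp only [pvDone, decide_eq_decide, lt_self_iff_false, eq_self_iff_true,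
                true_and, false_or]),
          filter_prefix n (j+1) (fun b => ((0:Int), b)) (pvDone 0 (j+1)) (by omega) (by omega)
            (fun a h1 h2 => by
              simp only [pvDone, decide_eq_decide, lt_self_iff_false, eq_self_iff_true,
                true_and, false_or]),
          PySem.List.pyRange_one_succ_right h0j, List.map_append]
        rfl
      · rw [if_neg hi0]
        apply List.filter_congr
        intro p hp
        obtain ⟨p1, p2⟩ := p
        obtain ⟨rfl, hq1, hq2⟩ := mem_borderT.mp hp
        simp only [pvDone, decide_eq_decide]
        omega
    · -- k = pvB
      rw [blkG_p (by intro h; rw [pvB] at h; rw [Prod.mk.injEq] at h; omega),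
        blkG_of_ne (by intro h; rw [pvB] at h; rw [Prod.mk.injEq] at h; omega) (by decide),
        blkG_of_ne (by intro h; rw [pvB] at h; rw [Prod.mk.injEq] at h; omega) (by decide),
        blkG_of_ne (by intro h; rw [pvB] at h; rw [Prod.mk.injEq] at h; omega) (by decide),
        blkG_of_ne (by intro h; rw [pvB] at h; rw [Prod.mk.injEq] at h; omega) (by intro h; rw [pvB] at h; rw [Prod.mk.injEq] at h; omega),
        blkG_of_ne (by intro h; rw [pvB] at h; rw [Prod.mk.injEq] at h; omega) (by intro h; rw [pvB] at h; rw [Prod.mk.injEq] at h; omega),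
        blkG_of_ne (by intro h; rw [pvB] at h; rw [Prod.mk.injEq] at h; omega) (by intro h; rw [pvB] at h; rw [Prod.mk.injEq] at h; omega),
        blkG_of_ne (by intro h; rw [pvB] at h; rw [Prod.mk.injEq] at h; omega) (by intro h; rw [pvB] at h; rw [Prod.mk.injEq] at h; omega),
        blkG_of_ne (by intro h; rw [pvB] at h; rw [Prod.mk.injEq] at h; omega) (by intro h; rw [pvB] at h; rw [Prod.mk.injEq] at h; omega),
        blkG_of_ne (by intro h; rw [pvB] at h; rw [Prod.mk.injEq] at h; omega) (by intro h; rw [pvB] at h; rw [Prod.mk.injEq] at h; omega)]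
      rw [valAt_B, valAt_B]
      by_cases hi1 : i = n - 1
      · subst hi1
        rw [if_pos rfl]
        have hnm : ((n - 1 : Int), j) ∉ (borderB n).filter (pvDone (n - 1) j) := by
          intro hm
          have h2 := (List.mem_filter.mp hm).2
          simp only [pvDone, decide_eq_true_eq] at h2
          omega
        rw [if_neg hnm]
        have hbB : borderB n = (PySem.List.pyRange 0 n 1).map (fun b => (n - 1, b)) := rfl
        rw [hbB,
          filter_prefix n j (fun b => (n - 1, b)) (pvDone (n - 1) j) h0j (le_of_lt hjn)
            (fun a h1 h2 => by
              simp only [pvDone, decide_eq_decide, lt_self_iff_false, eq_self_iff_true,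
                true_and, false_or]),
          filter_prefix n (j+1) (fun b => (n - 1, b)) (pvDone (n - 1) (j+1)) (by omega) (by omega)
            (fun a h1 h2 => by
              simp only [pvDone, decide_eq_decide, lt_self_iff_false, eq_self_iff_true,
                true_and, false_or]),
          PySem.List.pyRange_one_succ_right h0j, List.map_append]
        rfl
      · rw [if_neg hi1]
        apply List.filter_congr
        intro p hp
        obtain ⟨p1, p2⟩ := p
        obtain ⟨rfl, hq1, hq2⟩ := mem_borderB.mp hp
        simp only [pvDone, decide_eq_decide]
        omega

lemma valAt_row {n i : Int} (h0i : 0 ≤ i) (hin : i < n) :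
    ∀ k ∈ keysAll n, valAt n i n k = valAt n (i+1) 0 k := by
  intro k hk
  rcases List.mem_append.mp hk with hg | hv
  · obtain ⟨a, b⟩ := k
    obtain ⟨⟨ha0, han⟩, hb0, hbn⟩ := mem_keysG.mp hg
    rw [valAt_grid n i n a b ha0 hb0, valAt_grid n (i+1) 0 a b ha0 hb0]
    have hd : pvDone i n (a, b) = pvDone (i+1) 0 (a, b) := by
      rw [pvDone, pvDone, decide_eq_decide]; omega
    rw [hd]
    split_ifs with hdd
    · rfl
    · apply List.filter_congr
      intro p hp
      obtain ⟨p1, p2⟩ := p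
      simp only [List.mem_cons, List.not_mem_nil, or_false] at hp
      rw [pvInb, pvDone, pvDone, ← Bool.decide_and, ← Bool.decide_and, decide_eq_decide]
      rcases hp with h | h | h <;> (rw [Prod.mk.injEq] at h; omega)
  · simp only [List.mem_cons, List.not_mem_nil, or_false] at hv
    have hfil : ∀ (l : List (Int × Int)),
        (∀ p ∈ l, pvDone i n p = pvDone (i+1) 0 p) →
        l.filter (pvDone i n) = l.filter (pvDone (i+1) 0) := fun l h => List.filter_congr h
    rcases hv with rfl | rfl | rfl | rfl
    · rw [valAt_L, valAt_L]
      apply hfil; intro p hp; obtain ⟨p1, p2⟩ := p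
      obtain ⟨⟨h1, h2⟩, rfl⟩ := mem_borderL.mp hp
      rw [pvDone, pvDone, decide_eq_decide]; omega
    · rw [valAt_R, valAt_R]
      apply hfil; intro p hp; obtain ⟨p1, p2⟩ := p
      obtain ⟨⟨h1, h2⟩, rfl⟩ := mem_borderR.mp hp
      rw [pvDone, pvDone, decide_eq_decide]; omega
    · rw [valAt_T, valAt_T]
      apply hfil; intro p hp; obtain ⟨p1, p2⟩ := p
      obtain ⟨rfl, h1, h2⟩ := mem_borderT.mp hp
      rw [pvDone, pvDone, decide_eq_decide]; omega
    · rw [valAt_B, valAt_B]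
      apply hfil; intro p hp; obtain ⟨p1, p2⟩ := p
      obtain ⟨rfl, h1, h2⟩ := mem_borderB.mp hp
      rw [pvDone, pvDone, decide_eq_decide]; omega

lemma inner_loop {n i : Int} (h0i : 0 ≤ i) (hin : i < n) (c : Nat) :
    ∀ (j : Int) (e : PySem.Dict (Int × Int) (List (Int × Int))), j + c = n → 0 ≤ j →
      pvInv n e (valAt n i j) →
      pvInv n ((PySem.List.pyRange j n 1).foldl (fun e j => pvStepA n e i j) e) (valAt n i n) := by
  induction c with
  | zero =>
    intro j e hje h0j hInv
    have hj : j = n := by omega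
    rw [PySem.List.pyRange_one_eq_nil (show n ≤ j by omega)]
    rw [hj] at hInv
    exact hInv
  | succ c ih =>
    intro j e hje h0j hInv
    have hjn : j < n := by omega
    rw [PySem.List.pyRange_one_cons hjn, List.foldl_cons]
    exact ih (j+1) _ (by omega) (by omega)
      (pvInv_congr (step_inv h0i hin h0j hjn hInv) (stepF_val h0i hin h0j hjn))

lemma outer_loop {n : Int} (c : Nat) :
    ∀ (i : Int) (e : PySem.Dict (Int × Int) (List (Int × Int))), i + c = n → 0 ≤ i →
      pvInv n e (valAt n i 0) →
      pvInv n ((PySem.List.pyRange i n 1).foldl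
        (fun e i => (PySem.List.pyRange 0 n 1).foldl (fun e j => pvStepA n e i j) e) e)
        (valAt n n 0) := by
  induction c with
  | zero =>
    intro i e hie h0i hInv
    have hi : i = n := by omega
    rw [PySem.List.pyRange_one_eq_nil (show n ≤ i by omega)]
    rw [hi] at hInv
    exact hInv
  | succ c ih =>
    intro i e hie h0i hInv
    have hinn : i < n := by omega
    rw [PySem.List.pyRange_one_cons hinn, List.foldl_cons]
    refine ih (i+1) _ (by omega) (by omega) ?_
    have h1 := inner_loop h0i hinn n.toNat 0 e (by omega) (le_refl 0) hInv
    exact pvInv_congr h1 (valAt_row h0i hinn)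

lemma valAt_zero {n : Int} : ∀ k ∈ keysAll n, valAt n 0 0 k = [] := by
  intro k hk
  rcases List.mem_append.mp hk with hg | hv
  · obtain ⟨a, b⟩ := k
    obtain ⟨⟨ha0, han⟩, hb0, hbn⟩ := mem_keysG.mp hg
    rw [valAt_grid n 0 0 a b ha0 hb0]
    rw [if_neg (by rw [pvDone, decide_eq_true_eq]; omega)]
    rw [List.filter_eq_nil_iff]
    intro p hp
    obtain ⟨p1, p2⟩ := p
    simp only [List.mem_cons, List.not_mem_nil, or_false] at hp
    rw [pvInb, pvDone, ← Bool.decide_and, Bool.not_eq_true, decide_eq_false_iff_not]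
    rcases hp with h | h | h <;> (rw [Prod.mk.injEq] at h; omega)
  · simp only [List.mem_cons, List.not_mem_nil, or_false] at hv
    rcases hv with rfl | rfl | rfl | rfl
    · rw [valAt_L, List.filter_eq_nil_iff]
      intro p hp; obtain ⟨p1, p2⟩ := p
      obtain ⟨⟨h1, h2⟩, rfl⟩ := mem_borderL.mp hp
      rw [pvDone, Bool.not_eq_true, decide_eq_false_iff_not]; omega
    · rw [valAt_R, List.filter_eq_nil_iff]
      intro p hp; obtain ⟨p1, p2⟩ := p
      obtain ⟨⟨h1, h2⟩, rfl⟩ := mem_borderR.mp hp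
      rw [pvDone, Bool.not_eq_true, decide_eq_false_iff_not]; omega
    · rw [valAt_T, List.filter_eq_nil_iff]
      intro p hp; obtain ⟨p1, p2⟩ := p
      obtain ⟨rfl, h1, h2⟩ := mem_borderT.mp hp
      rw [pvDone, Bool.not_eq_true, decide_eq_false_iff_not]; omega
    · rw [valAt_B, List.filter_eq_nil_iff]
      intro p hp; obtain ⟨p1, p2⟩ := p
      obtain ⟨rfl, h1, h2⟩ := mem_borderB.mp hp
      rw [pvDone, Bool.not_eq_true, decide_eq_false_iff_not]; omega

lemma grid_fold_items (n : Int) :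
    ∀ (xs : List Int) (d : PySem.Dict (Int × Int) (List (Int × Int))), xs.Nodup →
      (∀ x ∈ xs, ∀ p ∈ d.keys, (p : Int × Int).1 ≠ x) →
      (xs.foldl (fun e i => (PySem.List.pyRange 0 n 1).foldl
          (fun e j => e.insert (i, j) ([] : List (Int × Int))) e) d).items
        = d.items ++ (xs ×ˢ PySem.List.pyRange 0 n 1).map (fun k => (k, [])) := by
  intro xs
  induction xs with
  | nil => intro d _ _; simp
  | cons x xs ih =>
    intro d hnd hfr
    rw [List.foldl_cons]
    have hfresh : ∀ a ∈ PySem.List.pyRange 0 n 1,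
        d.contains ((fun j => ((x : Int), j)) a) = false := by
      intro a _
      rw [PySem.Dict.contains_eq_decide_mem_keys, decide_eq_false_iff_not]
      intro hmem
      exact hfr x (List.mem_cons_self) (x, a) hmem rfl
    have hmap : ((PySem.List.pyRange 0 n 1).map (fun j => ((x : Int), j))).Nodup :=
      (PySem.List.nodup_pyRange_one 0 n).map (fun a b h => by
        rw [Prod.mk.injEq] at h; exact h.2)
    have hitems := PySem.Dict.items_foldl_insert_fresh (PySem.List.pyRange 0 n 1)
      (fun j => ((x : Int), j)) (fun _ => ([] : List (Int × Int))) d hfresh hmap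
    set d' := (PySem.List.pyRange 0 n 1).foldl
        (fun e j => e.insert (x, j) ([] : List (Int × Int))) d with hd'
    have hitems' : d'.items = d.items ++ (PySem.List.pyRange 0 n 1).map
        (fun j => (((x : Int), j), ([] : List (Int × Int)))) := hitems
    have hkeys' : d'.keys = d.keys ++ (PySem.List.pyRange 0 n 1).map (fun j => ((x : Int), j)) := by
      show d'.items.map Prod.fst = _
      rw [hitems', List.map_append, List.map_map]
      rfl
    rw [ih d' (List.Nodup.of_cons hnd) ?_, hitems', List.product_cons, List.map_append,
      List.append_assoc]
    · rw [List.map_map]; rfl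
    · intro x' hx' p hp
      rw [hkeys', List.mem_append] at hp
      rcases hp with hp | hp
      · exact hfr x' (List.mem_cons_of_mem _ hx') p hp
      · obtain ⟨a, _, rfl⟩ := List.mem_map.mp hp
        intro hcontra
        have hxx : x = x' := hcontra
        rw [← hxx] at hx'
        exact (List.nodup_cons.mp hnd).1 hx'

lemma init_inv (n : Int) :
    pvInv n ((((((PySem.List.pyRange 0 n 1).foldl
        (fun e i => (PySem.List.pyRange 0 n 1).foldl (fun e j => e.insert (i, j) []) e)
        PySem.Dict.empty).insert pvL []).insert pvR []).insert pvT []).insert pvB [])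
      (valAt n 0 0) := by
  have h0 := grid_fold_items n (PySem.List.pyRange 0 n 1) PySem.Dict.empty
    (PySem.List.nodup_pyRange_one 0 n)
    (by intro x _ p hp; rw [PySem.Dict.keys_empty] at hp; cases hp)
  set d0 := (PySem.List.pyRange 0 n 1).foldl
      (fun e i => (PySem.List.pyRange 0 n 1).foldl (fun e j => e.insert (i, j) []) e)
      PySem.Dict.empty with hd0
  have h0' : d0.items = (keysG n).map (fun k => (k, [])) := by
    rw [h0, keysG]
    rfl
  have hkeys0 : d0.keys = keysG n := by
    show d0.items.map Prod.fst = _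
    rw [h0', List.map_map]
    exact List.map_id _
  have hvirt : ∀ v : Int × Int, v.1 < 0 → d0.contains v = false := by
    intro v hv
    rw [PySem.Dict.contains_eq_decide_mem_keys, decide_eq_false_iff_not, hkeys0]
    intro hmem
    obtain ⟨a, b⟩ := v
    have := mem_keysG.mp hmem
    simp at hv
    omega
  have hL := PySem.Dict.items_insert_of_not_contains d0 ([] : List (Int × Int))
    (hvirt pvL (by decide))
  have hkL := PySem.Dict.keys_insert_of_not_contains d0 ([] : List (Int × Int))
    (hvirt pvL (by decide))
  have hcontR : (d0.insert pvL ([] : List (Int × Int))).contains pvR = false := by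
    rw [PySem.Dict.contains_eq_decide_mem_keys, decide_eq_false_iff_not, hkL, hkeys0,
      List.mem_append]
    rintro (hmem | hmem)
    · exact absurd (mem_keysG.mp hmem).1.1 (by decide)
    · simp [pvL, pvR] at hmem
  have hR := PySem.Dict.items_insert_of_not_contains (d0.insert pvL []) ([] : List (Int × Int)) hcontR
  have hkR := PySem.Dict.keys_insert_of_not_contains (d0.insert pvL []) ([] : List (Int × Int)) hcontR
  have hcontT : ((d0.insert pvL ([] : List (Int × Int))).insert pvR []).contains pvT = false := by
    rw [PySem.Dict.contains_eq_decide_mem_keys, decide_eq_false_iff_not, hkR, hkL, hkeys0,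
      List.mem_append, List.mem_append]
    rintro ((hmem | hmem) | hmem)
    · exact absurd (mem_keysG.mp hmem).1.1 (by decide)
    · simp [pvL, pvT] at hmem
    · simp [pvR, pvT] at hmem
  have hT := PySem.Dict.items_insert_of_not_contains ((d0.insert pvL []).insert pvR []) ([] : List (Int × Int)) hcontT
  have hkT := PySem.Dict.keys_insert_of_not_contains ((d0.insert pvL []).insert pvR []) ([] : List (Int × Int)) hcontT
  have hcontB : (((d0.insert pvL ([] : List (Int × Int))).insert pvR []).insert pvT []).contains pvB = false := by
    rw [PySem.Dict.contains_eq_decide_mem_keys, decide_eq_false_iff_not, hkT, hkR, hkL, hkeys0,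
      List.mem_append, List.mem_append, List.mem_append]
    rintro (((hmem | hmem) | hmem) | hmem)
    · exact absurd (mem_keysG.mp hmem).1.1 (by decide)
    · simp [pvL, pvB] at hmem
    · simp [pvR, pvB] at hmem
    · simp [pvT, pvB] at hmem
  have hB := PySem.Dict.items_insert_of_not_contains (((d0.insert pvL []).insert pvR []).insert pvT []) ([] : List (Int × Int)) hcontB
  have hkB := PySem.Dict.keys_insert_of_not_contains (((d0.insert pvL []).insert pvR []).insert pvT []) ([] : List (Int × Int)) hcontB
  have hitems : ((((d0.insert pvL ([] : List (Int × Int))).insert pvR []).insert pvT []).insert pvB []).items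
      = (keysAll n).map (fun k => (k, [])) := by
    rw [hB, hT, hR, hL, h0', keysAll, List.map_append]
    simp
  have hkeys : ((((d0.insert pvL ([] : List (Int × Int))).insert pvR []).insert pvT []).insert pvB []).keys
      = keysAll n := by
    rw [hkB, hkT, hkR, hkL, hkeys0, keysAll]
    simp
  refine ⟨hkeys, fun k hk => ?_⟩
  rw [valAt_zero k hk]
  exact PySem.Dict.getD_of_mem_items _
    (by rw [hitems]; exact List.mem_map.mpr ⟨k, hk, rfl⟩)
    (by rw [hkeys]; exact nodup_keysAll n) []

-- ===== VERDICT (by name: the statement is the Claim_ definition above) =====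
theorem build_hex_adjacency_spec : Claim_equal_build_hex_adjacency := by
  intro n _
  unfold Spec_build_hex_adjacency
  by_cases hn : 0 < n
  · have hloop := outer_loop (n := n) n.toNat 0 _ (by omega) (le_refl 0) (init_inv n)
    obtain ⟨hkeys, hval⟩ := hloop
    have hnd : ((PySem.List.pyRange 0 n 1).foldl
        (fun e i => (PySem.List.pyRange 0 n 1).foldl (fun e j => pvStepA n e i j) e)
        ((((((PySem.List.pyRange 0 n 1).foldl
          (fun e i => (PySem.List.pyRange 0 n 1).foldl (fun e j => e.insert (i, j) []) e)
          PySem.Dict.empty).insert pvL []).insert pvR []).insert pvT []).insert pvB [])).keys.Nodup := by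
      rw [hkeys]; exact nodup_keysAll n
    have hitems := PySem.Dict.items_eq_map_keys _ hnd ([] : List (Int × Int))
    rw [hkeys] at hitems
    have hitems2 := hitems.trans (List.map_congr_left (fun k hk => by rw [hval k hk]))
    show ((PySem.List.pyRange 0 n 1).foldl
        (fun e i => (PySem.List.pyRange 0 n 1).foldl (fun e j => pvStepA n e i j) e)
        ((((((PySem.List.pyRange 0 n 1).foldl
          (fun e i => (PySem.List.pyRange 0 n 1).foldl (fun e j => e.insert (i, j) []) e)
          PySem.Dict.empty).insert pvL []).insert pvR []).insert pvT []).insert pvB [])).items.map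
        (fun p => (p.1.1, p.1.2, p.2)) = build_hex_adjacency_alt n
    rw [hitems2, List.map_map, keysAll, List.map_append]
    unfold build_hex_adjacency_alt
    congr 1
    · -- grid part
      have hprod : keysG n = (PySem.List.pyRange 0 n 1).flatMap
          (fun a => (PySem.List.pyRange 0 n 1).map (Prod.mk a)) := rfl
      rw [hprod, List.map_flatMap]
      apply List.flatMap_congr
      intro i hi
      rw [PySem.List.mem_pyRange_one] at hi
      rw [List.map_map]
      apply List.map_congr_left
      intro j hj
      rw [PySem.List.mem_pyRange_one] at hj
      show (i, j, valAt n n 0 (i, j)) = (i, j, pvNbrs n i j)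
      rw [valAt_grid n n 0 i j (by omega) (by omega),
        if_pos (by rw [pvDone, decide_eq_true_eq]; omega)]
    · -- virtual part
      have hL : valAt n n 0 pvL = borderL n := by
        rw [valAt_L]
        apply List.filter_eq_self.mpr
        intro p hp; obtain ⟨p1, p2⟩ := p
        obtain ⟨⟨h1, h2⟩, rfl⟩ := mem_borderL.mp hp
        rw [pvDone, decide_eq_true_eq]; omega
      have hR : valAt n n 0 pvR = borderR n := by
        rw [valAt_R]
        apply List.filter_eq_self.mpr
        intro p hp; obtain ⟨p1, p2⟩ := p
        obtain ⟨⟨h1, h2⟩, rfl⟩ := mem_borderR.mp hp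
        rw [pvDone, decide_eq_true_eq]; omega
      have hT : valAt n n 0 pvT = borderT n := by
        rw [valAt_T]
        apply List.filter_eq_self.mpr
        intro p hp; obtain ⟨p1, p2⟩ := p
        obtain ⟨rfl, h1, h2⟩ := mem_borderT.mp hp
        rw [pvDone, decide_eq_true_eq]; omega
      have hB : valAt n n 0 pvB = borderB n := by
        rw [valAt_B]
        apply List.filter_eq_self.mpr
        intro p hp; obtain ⟨p1, p2⟩ := p
        obtain ⟨rfl, h1, h2⟩ := mem_borderB.mp hp
        rw [pvDone, decide_eq_true_eq]; omega
      simp only [List.map_cons, List.map_nil, Function.comp_apply]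
      rw [hL, hR, hT, hB]
      rfl
  · have hr : PySem.List.pyRange 0 n 1 = [] := PySem.List.pyRange_one_eq_nil (by omega)
    unfold build_hex_adjacency build_hex_adjacency_alt
    rw [hr]
    rfl
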